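-- pv_equiv track=rewrite | github.com/bailey4770/AOC-2025 | day08/solve.py | part2
-- ===== SOURCE A (Python) =====
-- import heapq
--
-- class UnionFind:
--     def __init__(self):
--         self.parent: dict[tuple[int, int, int], tuple[int, int, int]] = dict()
--         self.size: dict[tuple[int, int, int], int] = dict()
--         self.rank: dict[tuple[int, int, int], int] = dict()
--
--     def find(self, box: tuple[int, int, int]) -> tuple[int, int, int]:
--         parent = self.parent[box]
--
--         if parent != box:
--             # flattens everytime we call find
--             self.parent[box] = self.find(parent)
--         return self.parent[box]
--
--     def union(self, box1: tuple[int, int, int], box2: tuple[int, int, int]):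
--         root1 = self.find(box1)
--         root2 = self.find(box2)
--
--         if root1 == root2:
--             # roots are the same, so two boxes are already in the same tree
--             return
--
--         if self.rank[root1] > self.rank[root2]:
--             self.parent[root2] = root1
--             self.size[root1] += self.size[root2]
--         elif self.rank[root2] > self.rank[root1]:
--             self.parent[root1] = root2
--             self.size[root2] += self.size[root1]
--         else:
--             self.parent[root1] = root2
--             self.size[root2] += self.size[root1]
--             self.rank[root2] += 1
--
--     def sort(self):
--         roots: set[tuple[int, int, int]] = set()
--
--         for parent in self.parent.values():
--             roots.add(self.find(parent))
--
--         return sorted(roots, key=lambda root: self.size[root], reverse=True)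
--
-- def _calculate_distances(coordinates: list[tuple[int, int, int]]):
--     # instead of dictionary relating pairs of coordinates to distances
--     # we can build a min-heap of all distances. This auto-sorts distances as we add them
--     # rather than comparing every single item with each other, it simply ensures that parent < children
--     # therefore, the head is always the smallest item in the list. when we pop the head, the smallest of the children becomes the new head.
--     # this saves us huge numbers of comparisons, and hence computation time
--     distances: list[tuple[int, tuple[int, int, int], tuple[int, int, int]]] = []
--
--     for i, box1 in enumerate(coordinates[:-1]):
--         for box2 in coordinates[i + 1 :]:
--             # Euclidean distance is always sqrt of sum of squares
--             # however, relative order of distances is preserved without sqrt. this saves computation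
--             distance = (
--                 ((box1[0] - box2[0]) ** 2)
--                 + ((box1[1] - box2[1]) ** 2)
--                 + ((box1[2] - box2[2]) ** 2)
--             )
--             distances.append((distance, box1, box2))
--
--     return distances
--
-- def part2(coordinates: list[tuple[int, int, int]]):
--     distances = _calculate_distances(coordinates)
--     heapq.heapify(distances)
--
--     uf = UnionFind()
--     for box in coordinates:
--         uf.parent[box] = box
--         uf.size[box] = 1
--         uf.rank[box] = 0
--
--     while True:
--         _, box1, box2 = heapq.heappop(distances)
--         uf.union(box1, box2)
--         root = uf.find(box1)
--
--         if uf.size[root] == len(coordinates):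
--             break
--
--     return box1[0] * box2[0]
-- ===== SOURCE B (Python) =====
-- # B: Kruskal via flat component labels instead of a union-find class: edges are built by
-- # index loops and sorted once (no heapq); each merging edge relabels the absorbed
-- # component in a rebuilt dict and we return when a merge leaves a single label.
-- def part2(coordinates):
--     n = len(coordinates)
--     edges = []
--     for i in range(n - 1):
--         for j in range(i + 1, n):
--             b1 = coordinates[i]
--             b2 = coordinates[j]
--             d = (b1[0] - b2[0]) ** 2 + (b1[1] - b2[1]) ** 2 + (b1[2] - b2[2]) ** 2
--             edges.append((d, b1, b2))
--     edges.sort()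
--     comp = {box: box for box in coordinates}
--     for _, box1, box2 in edges:
--         c1 = comp[box1]
--         c2 = comp[box2]
--         if c1 != c2:
--             comp = {box: (c1 if c == c2 else c) for box, c in comp.items()}
--             if all(c == c1 for c in comp.values()):
--                 return box1[0] * box2[0]
--     raise ValueError("no spanning edge")
-- ===== Notes on version B (the rewrite author's own statement) =====
-- stated objective: alternative
-- what changed: B drops both the heap and the UnionFind class: edges are built by index loops and sorted once with list.sort(), and connectivity is tracked by a flat box-to-label dict that is rebuilt to relabel the absorbed component at each merging edge, returning when a merge leaves every box with the same label (no parent forest, no rank/size bookkeeping, no recursion).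
import Mathlib
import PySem

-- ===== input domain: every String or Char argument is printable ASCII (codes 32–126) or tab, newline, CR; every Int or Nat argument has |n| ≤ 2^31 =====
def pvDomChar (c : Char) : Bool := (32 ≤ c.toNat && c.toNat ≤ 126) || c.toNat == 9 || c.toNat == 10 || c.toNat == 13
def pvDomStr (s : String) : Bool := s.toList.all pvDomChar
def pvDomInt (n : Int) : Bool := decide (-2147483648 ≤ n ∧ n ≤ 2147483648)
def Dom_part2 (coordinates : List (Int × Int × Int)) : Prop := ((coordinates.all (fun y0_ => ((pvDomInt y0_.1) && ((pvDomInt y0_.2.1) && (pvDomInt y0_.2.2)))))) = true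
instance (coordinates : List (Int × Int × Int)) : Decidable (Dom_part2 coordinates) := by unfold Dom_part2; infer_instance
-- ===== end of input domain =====

-- One line: B drops both the heap and the union-find — edges are built by index loops and
-- sorted once, and connectivity is tracked by a flat box→label dict relabelled on each
-- merging edge (return when one label remains); objective: alternative (not faster).

-- ===== PORT A =====
-- element types: an edge is (squared distance, box1, box2)
abbrev TT : Type := Int × Int × Int
abbrev EE : Type := Int × TT × TT

-- Python's `<` on these tuples is lexicographic; keyE is the corresponding order-embedding
-- into the Lex products (exact for Python's tuple comparison).
def key3 (t : TT) : Lex (Int × Lex (Int × Int)) := toLex (t.1, toLex (t.2.1, t.2.2))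
def keyE (e : EE) : Lex (Int × Lex (Lex (Int × Lex (Int × Int)) × Lex (Int × Lex (Int × Int)))) :=
  toLex (e.1, toLex (key3 e.2.1, key3 e.2.2))
def eLt (a b : EE) : Bool := decide (keyE a < keyE b)

def dE : EE := (0, (0, 0, 0), (0, 0, 0))

-- literal transliteration of CPython heapq._siftdown (the bubble-up loop, newitem carried;
-- parentpos = (pos-1) >> 1 and the reads are inlined). The loop variable pos strictly
-- decreases, so with fuel ≥ pos the fuel-0 branch coincides with the loop exit.
def hqSiftdown (fuel startpos : Nat) (newitem : EE) (heap : List EE) (pos : Nat) : List EE :=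
  match fuel with
  | 0 => heap.set pos newitem
  | fuel + 1 =>
    if startpos < pos then
      if eLt newitem (heap.getD ((pos - 1) / 2) dE)
      then hqSiftdown fuel startpos newitem (heap.set pos (heap.getD ((pos - 1) / 2) dE)) ((pos - 1) / 2)
      else heap.set pos newitem
    else heap.set pos newitem

-- the childpos update inside heapq._siftup's loop: move to the right sibling
-- unless the left child is strictly smaller
def hqChild (endpos : Nat) (heap : List EE) (pos : Nat) : Nat :=
  if 2 * pos + 2 < endpos && !eLt (heap.getD (2 * pos + 1) dE) (heap.getD (2 * pos + 2) dE)
  then 2 * pos + 2 else 2 * pos + 1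

-- literal transliteration of CPython heapq._siftup's while-loop (walk down to a leaf following
-- the smaller child), ending in the _siftdown call. The loop variable pos strictly increases
-- below endpos, so with fuel ≥ endpos - pos the fuel-0 branch coincides with the loop exit;
-- the carried newitem is then bubbled up by _siftdown, whose own loop needs fuel ≤ pos.
def hqSiftupLoop (fuel endpos startpos : Nat) (newitem : EE) (heap : List EE) (pos : Nat) : List EE :=
  match fuel with
  | 0 => hqSiftdown pos startpos newitem heap pos
  | fuel + 1 =>
    if 2 * pos + 1 < endpos then
      hqSiftupLoop fuel endpos startpos newitem
        (heap.set pos (heap.getD (hqChild endpos heap pos) dE)) (hqChild endpos heap pos)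
    else hqSiftdown pos startpos newitem heap pos

def hqSiftup (heap : List EE) (pos : Nat) : List EE :=
  hqSiftupLoop heap.length heap.length pos (heap.getD pos dE) heap pos

-- heapq.heapify: for i in reversed(range(n//2)): _siftup(x, i)
def hqHeapifyAux (heap : List EE) : Nat → List EE
  | 0 => heap
  | k + 1 => hqHeapifyAux (hqSiftup heap k) k

def hqHeapify (xs : List EE) : List EE := hqHeapifyAux xs (xs.length / 2)

-- heapq.heappop; none = IndexError on the empty heap
def hqHeappop (heap : List EE) : Option (EE × List EE) :=
  match heap.getLast? with
  | none => none
  | some lastelt =>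
    match heap.dropLast with
    | [] => some (lastelt, [])
    | a :: t => some ((a :: t).getD 0 dE, hqSiftup ((a :: t).set 0 lastelt) 0)

-- the UnionFind class (A only)
structure UF where
  parent : PySem.Dict TT TT
  size : PySem.Dict TT Int
  rank : PySem.Dict TT Int

-- recursive find with path compression; fuel bounds the recursion depth (≥ path length on
-- every admitted run: parent maps stay acyclic and keys are always present, so getD never defaults)
def ufFind : Nat → UF → TT → UF × TT
  | 0, uf, box => (uf, box)
  | fuel + 1, uf, box =>
    if uf.parent.getD box box ≠ box then
      let p := ufFind fuel uf (uf.parent.getD box box)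
      let uf2 : UF := { p.1 with parent := p.1.parent.insert box p.2 }
      (uf2, uf2.parent.getD box box)
    else (uf, uf.parent.getD box box)

def ufFindTop (uf : UF) (box : TT) : UF × TT := ufFind (uf.parent.items.length + 1) uf box

def ufUnion (uf : UF) (box1 box2 : TT) : UF :=
  let p1 := ufFindTop uf box1
  let p2 := ufFindTop p1.1 box2
  let root1 := p1.2
  let root2 := p2.2
  let uf2 := p2.1
  if root1 = root2 then uf2
  else if uf2.rank.getD root1 0 > uf2.rank.getD root2 0 then
    { uf2 with parent := uf2.parent.insert root2 root1,
               size := uf2.size.insert root1 (uf2.size.getD root1 0 + uf2.size.getD root2 0) }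
  else if uf2.rank.getD root2 0 > uf2.rank.getD root1 0 then
    { uf2 with parent := uf2.parent.insert root1 root2,
               size := uf2.size.insert root2 (uf2.size.getD root2 0 + uf2.size.getD root1 0) }
  else
    { uf2 with parent := uf2.parent.insert root1 root2,
               size := uf2.size.insert root2 (uf2.size.getD root2 0 + uf2.size.getD root1 0),
               rank := uf2.rank.insert root2 (uf2.rank.getD root2 0 + 1) }

-- for box in coordinates: parent[box]=box; size[box]=1; rank[box]=0
def ufInit (coordinates : List TT) : UF :=
  coordinates.foldl
    (fun uf box =>
      { parent := uf.parent.insert box box,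
        size := uf.size.insert box 1,
        rank := uf.rank.insert box 0 })
    ⟨PySem.Dict.empty, PySem.Dict.empty, PySem.Dict.empty⟩

def dist2 (b1 b2 : TT) : Int :=
  (b1.1 - b2.1) ^ 2 + (b1.2.1 - b2.2.1) ^ 2 + (b1.2.2 - b2.2.2) ^ 2

-- _calculate_distances: nested for-loops appending to a list
def calcDistances (coordinates : List TT) : List EE :=
  (PySem.List.enumerate (PySem.List.slice coordinates none (some (-1))) 0).foldl
    (fun distances p =>
      (PySem.List.slice coordinates (some (p.1 + 1)) none).foldl
        (fun ds box2 => ds ++ [(dist2 p.2 box2, p.2, box2)]) distances)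
    []

-- A's while True: pop, union, find, break on full size; 0 where Python raises IndexError.
-- Each heappop shortens the heap, so with fuel ≥ heap length the fuel-0 branch coincides
-- with the empty-heap (IndexError) exit.
def loopA : Nat → List EE → UF → Int → Int
  | 0, _, _, _ => 0
  | fuel + 1, heap, uf, n =>
    match hqHeappop heap with
    | none => 0
    | some (e, heap') =>
      let uf1 := ufUnion uf e.2.1 e.2.2
      let p := ufFindTop uf1 e.2.1
      if p.1.size.getD p.2 0 = n then e.2.1.1 * e.2.2.1
      else loopA fuel heap' p.1 n

def part2 (coordinates : List (Int × Int × Int)) : Int :=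
  let distances := hqHeapify (calcDistances coordinates)
  loopA distances.length distances (ufInit coordinates) (PySem.List.len coordinates)

-- ===== PORT B =====
def dB : TT := (0, 0, 0)

-- index loops building the edge list, then edges.sort() (full-tuple comparison = keyE order)
def edgesB (coordinates : List TT) : List EE :=
  PySem.List.sorted
    ((PySem.List.pyRange 0 (PySem.List.len coordinates - 1) 1).foldl (fun es i =>
      (PySem.List.pyRange (i + 1) (PySem.List.len coordinates) 1).foldl (fun es j =>
        let b1 := PySem.List.pyGetD coordinates i dB
        let b2 := PySem.List.pyGetD coordinates j dB
        es ++ [(dist2 b1 b2, b1, b2)]) es) [])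
    keyE false

-- comp = {box: box for box in coordinates}
def compB (coordinates : List TT) : PySem.Dict TT TT :=
  coordinates.foldl (fun d box => d.insert box box) PySem.Dict.empty

-- comp = {box: (c1 if c == c2 else c) for box, c in comp.items()}
def relabelB (comp : PySem.Dict TT TT) (c2 c1 : TT) : PySem.Dict TT TT :=
  comp.items.foldl (fun d kv => d.insert kv.1 (if kv.2 = c2 then c1 else kv.2)) PySem.Dict.empty

-- B's for-loop over the sorted edges; 0 where B raises ValueError at exhaustion
def loopC : List EE → PySem.Dict TT TT → Int
  | [], _ => 0
  | e :: rest, comp =>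
    let c1 := comp.getD e.2.1 e.2.1
    let c2 := comp.getD e.2.2 e.2.2
    if c1 ≠ c2 then
      let comp' := relabelB comp c2 c1
      if comp'.values.all (fun c => c == c1) then e.2.1.1 * e.2.2.1
      else loopC rest comp'
    else loopC rest comp

def part2_alt (coordinates : List (Int × Int × Int)) : Int :=
  loopC (edgesB coordinates) (compB coordinates)

-- ===== PRECONDITION & SPEC =====
-- Pre_ excludes exactly the inputs on which A raises IndexError (pop from an exhausted heap):
-- lists with fewer than two elements or with duplicate points never reach full union size.
def Pre_part2 (coordinates : List (Int × Int × Int)) : Prop :=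
  2 ≤ coordinates.length ∧ coordinates.Nodup
instance (coordinates : List (Int × Int × Int)) : Decidable (Pre_part2 coordinates) := by
  unfold Pre_part2; infer_instance

def pvWitness_part2 : (List (Int × Int × Int)) := [(0, 0, 0), (1, 0, 0), (5, 3, 2)]

def Spec_part2 (coordinates : List (Int × Int × Int)) (out : Int) : Prop := out = part2_alt coordinates
instance (coordinates : List (Int × Int × Int)) (out : Int) : Decidable (Spec_part2 coordinates out) := by unfold Spec_part2; infer_instance

-- ===== CLAIM (what is proved, stated in full; the proofs are below) =====
def Claim_equal_part2 : Prop := ∀ (coordinates : List (Int × Int × Int)), Dom_part2 coordinates → Pre_part2 coordinates → Spec_part2 coordinates (part2 coordinates)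

-- ===== LEMMAS AND PROOFS =====


-- ---- order basics ----
theorem keyE_injective : Function.Injective keyE := by
  intro a b h
  simp only [keyE, key3, toLex_inj, Prod.mk.injEq] at h
  obtain ⟨a1, ⟨x1, x2, x3⟩, y1, y2, y3⟩ := a
  obtain ⟨b1, ⟨u1, u2, u3⟩, v1, v2, v3⟩ := b
  simp_all

theorem eLt_false_iff {a b : EE} : eLt a b = false ↔ keyE b ≤ keyE a := by
  simp [eLt, not_lt]

theorem eLt_true_iff {a b : EE} : eLt a b = true ↔ keyE a < keyE b := by
  simp [eLt]

-- ---- getD/set helpers ----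
def vA (l : List EE) (i : Nat) : Lex (Int × Lex (Lex (Int × Lex (Int × Int)) × Lex (Int × Lex (Int × Int)))) :=
  keyE (l.getD i dE)

theorem getD_set_self {l : List EE} {i : Nat} (h : i < l.length) (a : EE) :
    (l.set i a).getD i dE = a := by
  simp [List.getD_eq_getElem?_getD, h]

theorem getD_set_ne {l : List EE} {i j : Nat} (h : i ≠ j) (a : EE) :
    (l.set i a).getD j dE = l.getD j dE := by
  simp [List.getD_eq_getElem?_getD, List.getElem?_set_ne h]

def par (i : Nat) : Nat := (i - 1) / 2

theorem hqChild_bounds (e : Nat) (heap : List EE) (pos : Nat) :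
    pos < hqChild e heap pos ∧ (2 * pos + 1 < e → hqChild e heap pos < e) ∧
      par (hqChild e heap pos) = pos := by
  unfold hqChild par
  split
  · rename_i hc
    simp only [Bool.and_eq_true, decide_eq_true_eq] at hc
    refine ⟨by omega, fun _ => by omega, by omega⟩
  · exact ⟨by omega, fun h => h, by omega⟩

theorem length_hqSiftdown : ∀ (fuel s : Nat) (ni : EE) (l : List EE) (pos : Nat),
    (hqSiftdown fuel s ni l pos).length = l.length := by
  intro fuel
  induction fuel with
  | zero => intro s ni l pos; simp [hqSiftdown]
  | succ fuel ih =>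
    intro s ni l pos
    simp only [hqSiftdown]
    split
    · split
      · rw [ih]; simp
      · simp
    · simp

theorem length_hqSiftupLoop : ∀ (fuel e s : Nat) (ni : EE) (l : List EE) (pos : Nat),
    (hqSiftupLoop fuel e s ni l pos).length = l.length := by
  intro fuel
  induction fuel with
  | zero => intro e s ni l pos; simp only [hqSiftupLoop]; rw [length_hqSiftdown]
  | succ fuel ih =>
    intro e s ni l pos
    simp only [hqSiftupLoop]
    split
    · rw [ih]; simp
    · rw [length_hqSiftdown]

theorem hqHeappop_length {h : List EE} {x : EE} {h' : List EE}
    (hp : hqHeappop h = some (x, h')) : h'.length < h.length := by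
  unfold hqHeappop at hp
  cases hl : h.getLast? with
  | none => rw [hl] at hp; exact absurd hp (by simp)
  | some lastelt =>
    rw [hl] at hp
    have hne : h ≠ [] := by rintro rfl; simp at hl
    have hpos : 0 < h.length := List.length_pos_iff.mpr hne
    have hdl : h.dropLast.length = h.length - 1 := h.length_dropLast
    cases hr : h.dropLast with
    | nil =>
      rw [hr] at hp
      simp only [Option.some.injEq, Prod.mk.injEq] at hp
      obtain ⟨rfl, rfl⟩ := hp
      simp only [List.length_nil]
      omega
    | cons a t =>
      rw [hr] at hp
      simp only [Option.some.injEq, Prod.mk.injEq] at hp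
      obtain ⟨rfl, rfl⟩ := hp
      unfold hqSiftup
      rw [length_hqSiftupLoop]
      rw [hr] at hdl
      simp only [List.length_set, List.length_cons] at *
      omega

-- ---- permutation lemmas ----
theorem swap_out : ∀ (t : List EE) (k : Nat) (a : EE), k < t.length →
    (t.getD k dE :: t.set k a).Perm (a :: t) := by
  intro t
  induction t with
  | nil => intro k a h; simp at h
  | cons x t ih =>
    intro k a h
    cases k with
    | zero => simpa using List.Perm.swap a x t
    | succ k =>
      simp only [List.getD_cons_succ, List.set_cons_succ]
      exact ((List.Perm.swap x (t.getD k dE) (t.set k a)).trans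
        ((ih k a (by simpa using h)).cons x)).trans (List.Perm.swap a x t)

theorem set_swap_perm : ∀ (t : List EE) (k : Nat) (b c : EE), k < t.length →
    (b :: t.set k c).Perm (c :: t.set k b) := by
  intro t
  induction t with
  | nil => intro k b c h; simp at h
  | cons x t ih =>
    intro k b c h
    cases k with
    | zero => simpa using List.Perm.swap c b t
    | succ k =>
      simp only [List.set_cons_succ]
      exact ((List.Perm.swap x b (t.set k c)).trans
        ((ih k b c (by simpa using h)).cons x)).trans (List.Perm.swap c x (t.set k b))

theorem perm_set_set : ∀ (l : List EE) (i j : Nat) (a : EE), i < l.length → j < l.length →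
    i ≠ j → ((l.set i (l.getD j dE)).set j a).Perm (l.set i a) := by
  intro l
  induction l with
  | nil => intro i j a hi _ _; simp at hi
  | cons x t ih =>
    intro i j a hi hj hne
    cases i with
    | zero =>
      cases j with
      | zero => exact absurd rfl hne
      | succ m =>
        simp only [List.getD_cons_succ, List.set_cons_zero, List.set_cons_succ]
        exact swap_out t m a (by simpa using hj)
    | succ k =>
      cases j with
      | zero =>
        simp only [List.getD_cons_zero, List.set_cons_succ, List.set_cons_zero]
        exact set_swap_perm t k a x (by simpa using hi)
      | succ m =>
        simp only [List.getD_cons_succ, List.set_cons_succ]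
        exact (ih k m a (by simpa using hi) (by simpa using hj) (by omega)).cons x

theorem hqSiftdown_perm : ∀ (fuel s : Nat) (ni : EE) (l : List EE) (pos : Nat),
    pos ≤ fuel → pos < l.length → (hqSiftdown fuel s ni l pos).Perm (l.set pos ni) := by
  intro fuel
  induction fuel with
  | zero => intro s ni l pos hf hp; simp only [hqSiftdown]; exact List.Perm.refl _
  | succ fuel ih =>
    intro s ni l pos hf hp
    simp only [hqSiftdown]
    by_cases hsp : s < pos
    · rw [if_pos hsp]
      by_cases hcmp : eLt ni (l.getD ((pos - 1) / 2) dE) = true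
      · rw [if_pos hcmp]
        refine (ih s ni (l.set pos (l.getD ((pos - 1) / 2) dE)) ((pos - 1) / 2)
          (by omega) (by simp only [List.length_set]; omega)).trans ?_
        exact perm_set_set l pos ((pos - 1) / 2) ni hp (by omega) (by omega)
      · rw [if_neg hcmp]
    · rw [if_neg hsp]

theorem hqSiftupLoop_perm : ∀ (fuel e s : Nat) (ni : EE) (l : List EE) (pos : Nat),
    e = l.length → pos < l.length → (hqSiftupLoop fuel e s ni l pos).Perm (l.set pos ni) := by
  intro fuel
  induction fuel with
  | zero =>
    intro e s ni l pos he hp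
    simp only [hqSiftupLoop]
    exact hqSiftdown_perm pos s ni l pos le_rfl hp
  | succ fuel ih =>
    intro e s ni l pos he hp
    simp only [hqSiftupLoop]
    by_cases h1 : 2 * pos + 1 < e
    · rw [if_pos h1]
      obtain ⟨hgt, hlt', _⟩ := hqChild_bounds e l pos
      have hlt := hlt' h1
      refine (ih e s ni (l.set pos (l.getD (hqChild e l pos) dE)) (hqChild e l pos)
        (by simp [he]) (by simp only [List.length_set]; omega)).trans ?_
      exact perm_set_set l pos (hqChild e l pos) ni hp (by omega) (by omega)
    · rw [if_neg h1]
      exact hqSiftdown_perm pos s ni l pos le_rfl hp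

theorem length_hqSiftup (l : List EE) (pos : Nat) : (hqSiftup l pos).length = l.length :=
  length_hqSiftupLoop _ _ _ _ _ _

theorem hqSiftup_perm (l : List EE) (pos : Nat) (h : pos < l.length) :
    (hqSiftup l pos).Perm l := by
  unfold hqSiftup
  refine (hqSiftupLoop_perm _ _ _ _ _ _ rfl h).trans ?_
  rw [List.getD_eq_getElem l dE h, List.set_getElem_self]

theorem hqHeapifyAux_perm : ∀ (k : Nat) (l : List EE), k ≤ l.length →
    (hqHeapifyAux l k).Perm l := by
  intro k
  induction k with
  | zero => intro l _; exact List.Perm.refl _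
  | succ k ih =>
    intro l hk
    exact (ih (hqSiftup l k) (by rw [length_hqSiftup]; omega)).trans
      (hqSiftup_perm l k (by omega))

theorem hqHeapify_perm (xs : List EE) : (hqHeapify xs).Perm xs :=
  hqHeapifyAux_perm _ xs (Nat.div_le_self _ _)

-- ---- heap invariant ----
def HeapFrom (s : Nat) (l : List EE) : Prop :=
  ∀ i, 0 < i → i < l.length → s ≤ par i → vA l (par i) ≤ vA l i

theorem par_lt {i : Nat} (h : 0 < i) : par i < i := by unfold par; omega

theorem par_child {c pos : Nat} (h : par c = pos) (h0 : 0 < c) :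
    c = 2 * pos + 1 ∨ c = 2 * pos + 2 := by unfold par at h; omega

theorem vA_set_self {l : List EE} {i : Nat} (h : i < l.length) (a : EE) :
    vA (l.set i a) i = keyE a := by unfold vA; rw [getD_set_self h]

theorem vA_set_ne {l : List EE} {i j : Nat} (h : i ≠ j) (a : EE) :
    vA (l.set i a) j = vA l j := by unfold vA; rw [getD_set_ne h]

theorem hqChild_min (e : Nat) (l : List EE) (pos : Nat) :
    ∀ i, i < e → par i = pos → 0 < i → vA l (hqChild e l pos) ≤ vA l i := by
  intro i hie hpar hi0
  have hcase := par_child hpar hi0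
  unfold hqChild
  by_cases hcond : (2 * pos + 2 < e && !eLt (l.getD (2 * pos + 1) dE) (l.getD (2 * pos + 2) dE)) = true
  · rw [if_pos hcond]
    simp only [Bool.and_eq_true, Bool.not_eq_true', decide_eq_true_eq] at hcond
    have hle := eLt_false_iff.mp hcond.2
    rcases hcase with rfl | rfl
    · exact hle
    · exact le_refl _
  · rw [if_neg hcond]
    rcases hcase with rfl | rfl
    · exact le_refl _
    · simp only [Bool.and_eq_true, Bool.not_eq_true', decide_eq_true_eq, not_and] at hcond
      rcases Bool.eq_false_or_eq_true (eLt (l.getD (2 * pos + 1) dE) (l.getD (2 * pos + 2) dE)) with ht | hf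
      · exact le_of_lt (eLt_true_iff.mp ht)
      · exact absurd hf (hcond hie)

-- "s is an ancestor of j in the implicit binary tree"
def ancB (s j : Nat) : Bool :=
  if _ : j ≤ s then decide (j = s) else ancB s ((j - 1) / 2)
termination_by j
decreasing_by omega

theorem ancB_le {s j : Nat} : ancB s j = true → s ≤ j := by
  fun_induction ancB with
  | case1 j h => intro hd; simp only [decide_eq_true_eq] at hd; omega
  | case2 j h ih => intro _; omega

theorem ancB_self (s : Nat) : ancB s s = true := by
  rw [ancB]; simp

theorem ancB_child {s pos c : Nat} (h : ancB s pos = true) (h1 : pos < c) (h2 : par c = pos) :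
    ancB s c = true := by
  have hs := ancB_le h
  rw [ancB, dif_neg (by omega)]
  unfold par at h2
  rw [h2]
  exact h

theorem ancB_par {s pos : Nat} (h : ancB s pos = true) (hne : pos ≠ s) :
    s ≤ par pos ∧ ancB s (par pos) = true := by
  rw [ancB] at h
  split at h
  · simp only [decide_eq_true_eq] at h; exact absurd h hne
  · exact ⟨ancB_le h, h⟩

theorem heapSetBase (s : Nat) (ni : EE) (l : List EE) (hlen : s < l.length)
    (hU1 : ∀ i, 0 < i → i < l.length → s ≤ par i → i ≠ s → vA l (par i) ≤ vA l i)
    (hU2 : ∀ c, c < l.length → par c = s → 0 < c → keyE ni ≤ vA l c) :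
    HeapFrom s (l.set s ni) := by
  intro i hi0 hilen hsi
  simp only [List.length_set] at hilen
  have hipos : i ≠ s := by
    intro hc; subst hc; have := par_lt hi0; omega
  by_cases hpari : par i = s
  · rw [hpari, vA_set_self hlen, vA_set_ne (Ne.symm hipos)]
    exact hU2 i hilen hpari hi0
  · rw [vA_set_ne (fun hc => hpari hc.symm), vA_set_ne (Ne.symm hipos)]
    exact hU1 i hi0 hilen hsi hipos

theorem hqSiftdown_heap (s : Nat) (ni : EE) : ∀ (pos fuel : Nat) (l : List EE),
    pos ≤ fuel → pos < l.length → s ≤ pos → ancB s pos = true →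
    (∀ i, 0 < i → i < l.length → s ≤ par i → i ≠ pos → vA l (par i) ≤ vA l i) →
    (∀ c, c < l.length → par c = pos → 0 < c → keyE ni ≤ vA l c) →
    (pos ≠ s → ∀ c, c < l.length → par c = pos → 0 < c → vA l (par pos) ≤ vA l c) →
    HeapFrom s (hqSiftdown fuel s ni l pos) := by
  intro pos
  induction pos using Nat.strong_induction_on with
  | _ pos IH =>
    intro fuel l hf hlen hs hanc hU1 hU2 hU3
    cases fuel with
    | zero =>
      simp only [hqSiftdown]
      have hpos : pos = s := by omega
      subst hpos
      exact heapSetBase pos ni l hlen hU1 hU2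
    | succ fuel =>
      simp only [hqSiftdown]
      by_cases hsp : s < pos
      · rw [if_pos hsp]
        have hppar : (pos - 1) / 2 = par pos := rfl
        have hpplt : par pos < pos := par_lt (by omega)
        obtain ⟨hspar, hancp⟩ := ancB_par hanc (by omega)
        by_cases hcmp : eLt ni (l.getD ((pos - 1) / 2) dE) = true
        · rw [if_pos hcmp]
          rw [hppar]
          have hlt : keyE ni < vA l (par pos) := eLt_true_iff.mp (hppar ▸ hcmp)
          apply IH (par pos) hpplt fuel (l.set pos (l.getD (par pos) dE)) (by omega)
          · simp only [List.length_set]; omega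
          · exact hspar
          · exact hancp
          · -- U1'
            intro i hi0 hilen hsi hine
            simp only [List.length_set] at hilen
            by_cases hipos : i = pos
            · subst hipos
              rw [vA_set_ne (by omega), vA_set_self hlen]
              exact le_of_eq rfl
            · by_cases hpari : par i = pos
              · rw [hpari, vA_set_self hlen, vA_set_ne (Ne.symm hipos)]
                exact hU3 (by omega) i hilen hpari hi0
              · rw [vA_set_ne (fun hc => hpari hc.symm), vA_set_ne (Ne.symm hipos)]
                exact hU1 i hi0 hilen hsi hipos
          · -- U2'
            intro c hclen hparc hc0
            simp only [List.length_set] at hclen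
            by_cases hcpos : c = pos
            · subst hcpos
              rw [vA_set_self hlen]
              exact le_of_lt hlt
            · rw [vA_set_ne (Ne.symm hcpos)]
              have h2 : vA l (par c) ≤ vA l c :=
                hU1 c hc0 hclen (by rw [hparc]; exact hspar) hcpos
              rw [hparc] at h2
              exact le_trans (le_of_lt hlt) h2
          · -- U3'
            intro hppne c hclen hparc hc0
            simp only [List.length_set] at hclen
            have hpp0 : 0 < par pos := by omega
            obtain ⟨hsparpar, _⟩ := ancB_par hancp hppne
            have hU1pp : vA l (par (par pos)) ≤ vA l (par pos) :=
              hU1 (par pos) hpp0 (by omega) hsparpar (by omega)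
            have hparparne : par (par pos) ≠ pos := by have := par_lt hpp0; omega
            rw [vA_set_ne (Ne.symm hparparne)]
            by_cases hcpos : c = pos
            · subst hcpos
              rw [vA_set_self hlen]
              exact hU1pp
            · rw [vA_set_ne (Ne.symm hcpos)]
              have h2 : vA l (par c) ≤ vA l c :=
                hU1 c hc0 hclen (by rw [hparc]; exact hspar) hcpos
              rw [hparc] at h2
              exact le_trans hU1pp h2
        · rw [if_neg hcmp]
          have hge : vA l (par pos) ≤ keyE ni := eLt_false_iff.mp (by
            rcases Bool.eq_false_or_eq_true (eLt ni (l.getD ((pos - 1) / 2) dE)) with ht | hf2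
            · exact absurd ht hcmp
            · exact hf2)
          intro i hi0 hilen hsi
          simp only [List.length_set] at hilen
          by_cases hipos : i = pos
          · subst hipos
            rw [vA_set_ne (by have := par_lt hi0; omega), vA_set_self hlen]
            exact hge
          · by_cases hpari : par i = pos
            · rw [hpari, vA_set_self hlen, vA_set_ne (Ne.symm hipos)]
              exact hU2 i hilen hpari hi0
            · rw [vA_set_ne (fun hc => hpari hc.symm), vA_set_ne (Ne.symm hipos)]
              exact hU1 i hi0 hilen hsi hipos
      · rw [if_neg hsp]
        have hpos : pos = s := by omega
        subst hpos
        exact heapSetBase pos ni l hlen hU1 hU2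

theorem hqSiftdown_heap_leaf (e s : Nat) (ni : EE) (pos : Nat) (l : List EE)
    (he : e = l.length) (hlen : pos < l.length) (hs : s ≤ pos) (hanc : ancB s pos = true)
    (h1 : ¬ 2 * pos + 1 < e)
    (hJ1 : ∀ i, 0 < i → i < l.length → s ≤ par i → i ≠ pos → par i ≠ pos →
      vA l (par i) ≤ vA l i) :
    HeapFrom s (hqSiftdown pos s ni l pos) := by
  apply hqSiftdown_heap s ni pos pos l le_rfl hlen hs hanc
  · intro i hi0 hilen hsi hine
    by_cases hpari : par i = pos
    · exfalso; unfold par at hpari; omega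
    · exact hJ1 i hi0 hilen hsi hine hpari
  · intro cc hcclen hparcc hcc0
    exfalso; unfold par at hparcc; omega
  · intro _ cc hcclen hparcc hcc0
    exfalso; unfold par at hparcc; omega

theorem hqSiftupLoop_heap (e s : Nat) (ni : EE) : ∀ (fuel pos : Nat) (l : List EE),
    e - pos ≤ fuel → e = l.length → pos < l.length → s ≤ pos → ancB s pos = true →
    (∀ i, 0 < i → i < l.length → s ≤ par i → i ≠ pos → par i ≠ pos → vA l (par i) ≤ vA l i) →
    (pos ≠ s → ∀ c, c < l.length → par c = pos → vA l (par pos) ≤ vA l c) →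
    HeapFrom s (hqSiftupLoop fuel e s ni l pos) := by
  intro fuel
  induction fuel with
  | zero =>
    intro pos l hf he hlen hs hanc hJ1 hJ2
    simp only [hqSiftupLoop]
    exact hqSiftdown_heap_leaf e s ni pos l he hlen hs hanc (by omega) hJ1
  | succ fuel IH =>
    intro pos l hf he hlen hs hanc hJ1 hJ2
    simp only [hqSiftupLoop]
    by_cases h1 : 2 * pos + 1 < e
    · rw [if_pos h1]
      obtain ⟨hcgt, hclt', hcpar⟩ := hqChild_bounds e l pos
      have hclt := hclt' h1
      set c := hqChild e l pos with hc
      have hclen : c < l.length := by omega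
      refine IH c (l.set pos (l.getD c dE)) (by omega)
        (by simp only [List.length_set]; exact he)
        (by simp only [List.length_set]; omega) (by omega)
        (ancB_child hanc hcgt hcpar) ?_ ?_
      · -- J1 for the next state
        intro i hi0 hilen hsi hine hparine
        simp only [List.length_set] at hilen
        by_cases hipos : i = pos
        · subst hipos
          have hposne : i ≠ s := by
            intro hceq; subst hceq; have := par_lt hi0; omega
          rw [vA_set_ne (show i ≠ par i by have := par_lt hi0; omega), vA_set_self hlen]
          exact hJ2 hposne c hclen hcpar
        · by_cases hpari : par i = pos
          · rw [hpari, vA_set_self hlen, vA_set_ne (Ne.symm hipos)]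
            rw [hc]
            exact hqChild_min e l pos i (by omega) hpari hi0
          · rw [vA_set_ne (fun hcc => hpari hcc.symm), vA_set_ne (Ne.symm hipos)]
            exact hJ1 i hi0 hilen hsi hipos hpari
      · -- J2 for the next state
        intro _ gc hgclen hpargc
        simp only [List.length_set] at hgclen
        have hgcgt : c < gc := by unfold par at hpargc; omega
        rw [hcpar, vA_set_self hlen, vA_set_ne (show pos ≠ gc by omega)]
        have h2 := hJ1 gc (by omega) hgclen (by rw [hpargc]; omega) (by omega)
          (by rw [hpargc]; omega)
        rw [hpargc] at h2
        exact h2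
    · rw [if_neg h1]
      exact hqSiftdown_heap_leaf e s ni pos l he hlen hs hanc h1 hJ1

theorem hqSiftup_heap (l : List EE) (pos : Nat) (h : pos < l.length)
    (hpre : HeapFrom (pos + 1) l) : HeapFrom pos (hqSiftup l pos) := by
  unfold hqSiftup
  refine hqSiftupLoop_heap l.length pos (l.getD pos dE) l.length pos l (by omega) rfl h
    (le_refl pos) (ancB_self pos) ?_ (fun hne => absurd rfl hne)
  intro i hi0 hilen hsi hine hparine
  exact hpre i hi0 hilen (by omega)

theorem heapFrom_init (xs : List EE) : HeapFrom (xs.length / 2) xs := by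
  intro i hi0 hilen hpar
  exfalso; unfold par at hpar; omega

theorem hqHeapifyAux_heap : ∀ (k : Nat) (l : List EE), k ≤ l.length → HeapFrom k l →
    HeapFrom 0 (hqHeapifyAux l k) := by
  intro k
  induction k with
  | zero => intro l _ h; exact h
  | succ k ih =>
    intro l hk hh
    exact ih (hqSiftup l k) (by rw [length_hqSiftup]; omega) (hqSiftup_heap l k (by omega) hh)

theorem hqHeapify_heap (xs : List EE) : HeapFrom 0 (hqHeapify xs) :=
  hqHeapifyAux_heap _ xs (Nat.div_le_self _ _) (heapFrom_init xs)

theorem root_min {l : List EE} (hh : HeapFrom 0 l) : ∀ i, i < l.length → vA l 0 ≤ vA l i := by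
  intro i
  induction i using Nat.strong_induction_on with
  | _ i ih =>
    intro hi
    rcases Nat.eq_zero_or_pos i with rfl | hpos
    · exact le_refl _
    · exact (ih (par i) (by unfold par; omega) (by unfold par; omega)).trans
        (hh i hpos hi (Nat.zero_le _))

theorem hqHeappop_spec {h : List EE} {x : EE} {h' : List EE}
    (hp : hqHeappop h = some (x, h')) :
    (x :: h').Perm h ∧ (HeapFrom 0 h → HeapFrom 0 h' ∧ ∀ y ∈ h, keyE x ≤ keyE y) := by
  unfold hqHeappop at hp
  cases hl : h.getLast? with
  | none => rw [hl] at hp; exact absurd hp (by simp)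
  | some lastelt =>
    rw [hl] at hp
    have hne : h ≠ [] := by rintro rfl; simp at hl
    have hlast : h.getLast hne = lastelt := by
      rw [List.getLast?_eq_some_getLast hne] at hl
      exact Option.some.inj hl
    have hsplit : h.dropLast ++ [lastelt] = h := by
      rw [← hlast]; exact List.dropLast_append_getLast hne
    cases hr : h.dropLast with
    | nil =>
      rw [hr] at hp
      simp only [Option.some.injEq, Prod.mk.injEq] at hp
      obtain ⟨rfl, rfl⟩ := hp
      rw [hr] at hsplit
      constructor
      · rw [← hsplit]; exact List.Perm.refl _
      · intro _
        refine ⟨fun i hi0 hilen _ => absurd hilen (by simp), ?_⟩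
        intro y hy
        rw [← hsplit] at hy
        simp only [List.nil_append, List.mem_singleton] at hy
        subst hy; exact le_refl _
    | cons a t =>
      rw [hr] at hp
      simp only [Option.some.injEq, Prod.mk.injEq] at hp
      obtain ⟨rfl, rfl⟩ := hp
      have hpos : 0 < h.length := List.length_pos_iff.mpr hne
      have hdl : h.dropLast.length = h.length - 1 := h.length_dropLast
      have hlenh : h.length = t.length + 2 := by rw [hr] at hdl; simp at hdl; omega
      have hset : (a :: t).set 0 lastelt = lastelt :: t := rfl
      have hlen2 : 0 < ((a :: t).set 0 lastelt).length := by simp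
      have hperm1 : (hqSiftup ((a :: t).set 0 lastelt) 0).Perm (lastelt :: t) :=
        hset ▸ hqSiftup_perm _ 0 hlen2
      rw [hr] at hsplit
      have hgetD0 : ∀ j, j < t.length + 1 → h.getD j dE = (a :: t).getD j dE := by
        intro j hj
        rw [← hsplit, List.getD_append]
        simpa using hj
      constructor
      · simp only [List.getD_cons_zero]
        refine (hperm1.cons a).trans ?_
        refine (List.Perm.swap lastelt a t).trans ?_
        rw [← hsplit]
        exact List.perm_cons_append_cons lastelt (by simp)
      · intro hh
        constructor
        · apply hqSiftup_heap _ 0 hlen2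
          rw [hset]
          intro i hi0 hilen hpar
          simp only [List.length_cons] at hilen
          have hpar0 : 0 < par i := by omega
          have hparlt : par i < i := par_lt hi0
          have hv : ∀ j, 0 < j → j < t.length + 1 → vA (lastelt :: t) j = vA h j := by
            intro j hj0 hjlen
            unfold vA
            rw [hgetD0 j hjlen]
            cases j with
            | zero => omega
            | succ j' => simp only [List.getD_cons_succ]
          rw [hv (par i) hpar0 (by omega), hv i hi0 (by omega)]
          exact hh i hi0 (by omega) (Nat.zero_le _)
        · intro y hy
          obtain ⟨i, hi, rfl⟩ := List.mem_iff_getElem.mp hy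
          have hx : keyE ((a :: t).getD 0 dE) = vA h 0 := by
            unfold vA
            rw [hgetD0 0 (by omega)]
          rw [hx]
          have := root_min hh i hi
          unfold vA at this
          rwa [List.getD_eq_getElem h dE hi] at this

theorem hqHeappop_eq_none_iff {h : List EE} : hqHeappop h = none ↔ h = [] := by
  unfold hqHeappop
  cases hl : h.getLast? with
  | none => simp [List.getLast?_eq_none_iff.mp hl]
  | some lastelt =>
    have : h ≠ [] := by rintro rfl; simp at hl
    cases hr : h.dropLast <;> simp [this]

-- ---- pop sequence ----
def popSeq (h : List EE) : List EE :=
  match hp : hqHeappop h with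
  | none => []
  | some (x, h') => x :: popSeq h'
termination_by h.length
decreasing_by exact hqHeappop_length hp

theorem popSeq_eq_nil {h : List EE} (hp : hqHeappop h = none) : popSeq h = [] := by
  rw [popSeq]
  split
  · rfl
  · rename_i x h' heq
    rw [hp] at heq
    cases heq

theorem popSeq_eq_cons {h : List EE} {x : EE} {h' : List EE}
    (hp : hqHeappop h = some (x, h')) : popSeq h = x :: popSeq h' := by
  rw [popSeq]
  split
  · rename_i heq
    rw [hp] at heq
    cases heq
  · rename_i x2 h2 heq
    rw [hp] at heq
    simp only [Option.some.injEq, Prod.mk.injEq] at heq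
    obtain ⟨rfl, rfl⟩ := heq
    rfl

theorem popSeq_perm_aux : ∀ (n : Nat) (h : List EE), h.length ≤ n → (popSeq h).Perm h := by
  intro n
  induction n with
  | zero =>
    intro h hl
    have : h = [] := by cases h <;> simp_all
    subst this
    rw [popSeq_eq_nil (hqHeappop_eq_none_iff.mpr rfl)]
  | succ n ih =>
    intro h hl
    cases hp : hqHeappop h with
    | none => rw [popSeq_eq_nil hp, hqHeappop_eq_none_iff.mp hp]
    | some p =>
      obtain ⟨x, h'⟩ := p
      rw [popSeq_eq_cons hp]
      have := hqHeappop_length hp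
      exact ((ih h' (by omega)).cons x).trans (hqHeappop_spec hp).1

theorem popSeq_perm (h : List EE) : (popSeq h).Perm h := popSeq_perm_aux h.length h le_rfl

theorem popSeq_pairwise_aux : ∀ (n : Nat) (h : List EE), h.length ≤ n → HeapFrom 0 h →
    (popSeq h).Pairwise (fun a b => keyE a ≤ keyE b) := by
  intro n
  induction n with
  | zero =>
    intro h hl _
    have : h = [] := by cases h <;> simp_all
    subst this
    rw [popSeq_eq_nil (hqHeappop_eq_none_iff.mpr rfl)]
    exact List.Pairwise.nil
  | succ n ih =>
    intro h hl hh
    cases hp : hqHeappop h with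
    | none =>
      rw [popSeq_eq_nil hp]
      exact List.Pairwise.nil
    | some p =>
      obtain ⟨x, h'⟩ := p
      rw [popSeq_eq_cons hp]
      obtain ⟨hperm, hspec⟩ := hqHeappop_spec hp
      obtain ⟨hh', hmin⟩ := hspec hh
      have hlt := hqHeappop_length hp
      refine List.Pairwise.cons ?_ (ih h' (by omega) hh')
      intro y hy
      exact hmin y (hperm.subset (List.mem_cons_of_mem x ((popSeq_perm h').mem_iff.mp hy)))

theorem popSeq_pairwise (h : List EE) (hh : HeapFrom 0 h) :
    (popSeq h).Pairwise (fun a b => keyE a ≤ keyE b) :=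
  popSeq_pairwise_aux h.length h le_rfl hh

theorem popSeq_heapify_eq_sorted (xs : List EE) :
    popSeq (hqHeapify xs) = PySem.List.sorted xs keyE false := by
  have h1 : (popSeq (hqHeapify xs)).Perm xs := (popSeq_perm _).trans (hqHeapify_perm xs)
  have h2 : (PySem.List.sorted xs keyE false).Perm xs := PySem.List.sorted_perm xs keyE false
  exact PySem.List.eq_of_perm_of_pairwise_le_of_injective keyE keyE_injective
    (h1.trans h2.symm) (popSeq_pairwise _ (hqHeapify_heap xs)) (PySem.List.sorted_pairwise xs keyE)

-- ---- A's pop loop over the pop sequence ----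
def loopUF : List EE → UF → Int → Int
  | [], _, _ => 0
  | e :: rest, uf, n =>
    let uf1 := ufUnion uf e.2.1 e.2.2
    let p := ufFindTop uf1 e.2.1
    if p.1.size.getD p.2 0 = n then e.2.1.1 * e.2.2.1
    else loopUF rest p.1 n

theorem loopA_eq_loopUF : ∀ (fuel : Nat) (h : List EE) (uf : UF) (n : Int), h.length ≤ fuel →
    loopA fuel h uf n = loopUF (popSeq h) uf n := by
  intro fuel
  induction fuel with
  | zero =>
    intro h uf n hl
    have : h = [] := by cases h <;> simp_all
    subst this
    rw [popSeq_eq_nil (hqHeappop_eq_none_iff.mpr rfl)]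
    rfl
  | succ fuel ih =>
    intro h uf n hl
    cases hp : hqHeappop h with
    | none =>
      rw [popSeq_eq_nil hp]
      simp only [loopA, hp]
      rfl
    | some p =>
      obtain ⟨e, h'⟩ := p
      rw [popSeq_eq_cons hp]
      have hlt := hqHeappop_length hp
      simp only [loopA, hp, loopUF]
      split
      · rfl
      · exact ih h' _ n (by omega)


-- ---- union-find forest theory (A side) ----
def pstep (p : PySem.Dict TT TT) (x : TT) : TT := p.getD x x

inductive UFPath (p : PySem.Dict TT TT) : TT → TT → Prop
  | refl (x : TT) : UFPath p x x
  | step {x r : TT} : pstep p x ≠ x → UFPath p (pstep p x) r → UFPath p x r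

def UFRoot (p : PySem.Dict TT TT) (r : TT) : Prop := pstep p r = r

def UFReach (p : PySem.Dict TT TT) (x r : TT) : Prop := UFPath p x r ∧ UFRoot p r

inductive UFPathN (p : PySem.Dict TT TT) : TT → TT → Nat → Prop
  | refl (x : TT) : UFPathN p x x 0
  | step {x r : TT} {k : Nat} : pstep p x ≠ x → UFPathN p (pstep p x) r k → UFPathN p x r (k + 1)

theorem reach_unique {p : PySem.Dict TT TT} {x r s : TT}
    (h1 : UFPath p x r) (hr1 : UFRoot p r) (h2 : UFPath p x s) (hr2 : UFRoot p s) : r = s := by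
  induction h1 generalizing s with
  | refl a =>
    cases h2 with
    | refl => rfl
    | step hne _ => exact absurd hr1 hne
  | step hne hpath ih =>
    cases h2 with
    | refl => exact absurd hr2 hne
    | step hne2 hpath2 => exact ih hr1 hpath2 hr2

theorem pathN_of_path {p : PySem.Dict TT TT} {x r : TT} (h : UFPath p x r) :
    ∃ k, UFPathN p x r k := by
  induction h with
  | refl a => exact ⟨0, UFPathN.refl a⟩
  | step hne _ ih => exact ⟨ih.choose + 1, UFPathN.step hne ih.choose_spec⟩

theorem path_of_pathN {p : PySem.Dict TT TT} {x r : TT} {k : Nat} (h : UFPathN p x r k) :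
    UFPath p x r := by
  induction h with
  | refl a => exact UFPath.refl a
  | step hne _ ih => exact UFPath.step hne ih

theorem pathN_unique_len {p : PySem.Dict TT TT} {x r s : TT} {k j : Nat}
    (h1 : UFPathN p x r k) (hr1 : UFRoot p r) (h2 : UFPathN p x s j) (hr2 : UFRoot p s) :
    k = j := by
  induction h1 generalizing s j with
  | refl a =>
    cases h2 with
    | refl => rfl
    | step hne _ => exact absurd hr1 hne
  | step hne h ih =>
    cases h2 with
    | refl => exact absurd hr2 hne
    | step hne2 h2' => rw [ih hr1 h2' hr2]

theorem chain_ex {p : PySem.Dict TT TT} {r : TT} : ∀ (k : Nat) (x : TT),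
    UFPathN p x r k → UFRoot p r →
    ∃ l : List TT, l.Nodup ∧ l.length = k + 1 ∧
      ∀ y ∈ l, UFPath p x y ∧ ∃ j, j ≤ k ∧ UFPathN p y r j := by
  intro k
  induction k with
  | zero =>
    intro x h hr
    have hrx : r = x := by cases h; rfl
    refine ⟨[x], List.nodup_singleton x, rfl, ?_⟩
    intro y hy
    rw [List.mem_singleton] at hy
    subst hy
    rw [hrx]
    exact ⟨UFPath.refl y, 0, le_rfl, UFPathN.refl y⟩
  | succ k ih =>
    intro x h hr
    cases h with
    | step hne h' =>
      obtain ⟨l, hnd, hlen, hmem⟩ := ih _ h' hr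
      have hxl : x ∉ l := by
        intro hx
        obtain ⟨_, j, hj, hpN⟩ := hmem x hx
        have := pathN_unique_len hpN hr (UFPathN.step hne h') hr
        omega
      refine ⟨x :: l, List.nodup_cons.mpr ⟨hxl, hnd⟩, by simp [hlen], ?_⟩
      intro y hy
      rcases List.mem_cons.mp hy with rfl | hy'
      · exact ⟨UFPath.refl y, k + 1, le_rfl, UFPathN.step hne h'⟩
      · obtain ⟨hp1, j, hj, hpN⟩ := hmem y hy'
        exact ⟨UFPath.step hne hp1, j, by omega, hpN⟩

theorem path_mem {p : PySem.Dict TT TT} {C : List TT} {x y : TT}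
    (h : UFPath p x y) (hx : x ∈ C) (hcl : ∀ z ∈ C, pstep p z ∈ C) : y ∈ C := by
  have key : ∀ {a b : TT}, UFPath p a b → a ∈ C → b ∈ C := by
    intro a b hab
    induction hab with
    | refl c => exact fun h => h
    | step hne _ ih => exact fun ha => ih (hcl _ ha)
  exact key h hx

theorem pathN_lt_of_nodup {p : PySem.Dict TT TT} {C : List TT} {x r : TT} {k : Nat}
    (hC : C.Nodup) (hx : x ∈ C) (hcl : ∀ z ∈ C, pstep p z ∈ C)
    (h : UFPathN p x r k) (hr : UFRoot p r) : k < C.length := by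
  obtain ⟨l, hnd, hlen, hmem⟩ := chain_ex k x h hr
  have hsub : l ⊆ C := fun y hy => path_mem (hmem y hy).1 hx hcl
  have := (List.subperm_of_subset hnd hsub).length_le
  omega

theorem contains_of_pstep_ne {p : PySem.Dict TT TT} {x : TT} (h : pstep p x ≠ x) :
    p.contains x = true := by
  cases hc : p.contains x with
  | true => rfl
  | false =>
    refine absurd ?_ h
    show p.getD x x = x
    exact PySem.Dict.getD_of_not_contains _ _ hc

theorem pstep_insert (p : PySem.Dict TT TT) (x0 r0 z : TT) :
    pstep (p.insert x0 r0) z = if z = x0 then r0 else pstep p z := by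
  simp [pstep, PySem.Dict.getD_insert]

theorem reach_insert_root {p : PySem.Dict TT TT} {x0 r0 : TT} (h0 : UFReach p x0 r0) :
    ∀ {y s : TT}, UFReach p y s → UFReach (p.insert x0 r0) y s := by
  obtain ⟨hp0, hr0⟩ := h0
  intro y s hys
  obtain ⟨hpys, hrs⟩ := hys
  have hroot : ∀ t, UFRoot p t → UFRoot (p.insert x0 r0) t := by
    intro t ht
    show pstep _ t = t
    rw [pstep_insert]
    by_cases htx : t = x0
    · subst htx
      have hr0t : r0 = t := reach_unique hp0 hr0 (UFPath.refl t) ht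
      simp [hr0t]
    · rw [if_neg htx]; exact ht
  refine ⟨?_, hroot s hrs⟩
  have hpath : ∀ {a b : TT}, UFPath p a b → UFRoot p b → UFPath (p.insert x0 r0) a b := by
    intro a b hab
    induction hab with
    | refl c => intro _; exact UFPath.refl c
    | @step a' r' hne hnext ih =>
      intro hrb
      by_cases hax : a' = x0
      · subst hax
        have hrr : r' = r0 := reach_unique (UFPath.step hne hnext) hrb hp0 hr0
        subst hrr
        have hps : pstep (p.insert a' r') a' = r' := by rw [pstep_insert]; simp
        by_cases hr0x : r' = a'
        · rw [hr0x]; exact UFPath.refl a'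
        · refine UFPath.step ?_ ?_
          · rw [hps]; exact hr0x
          · rw [hps]; exact UFPath.refl r'
      · have hps : pstep (p.insert x0 r0) a' = pstep p a' := by rw [pstep_insert, if_neg hax]
        refine UFPath.step ?_ ?_
        · rw [hps]; exact hne
        · rw [hps]; exact ih hrb
  exact hpath hpys hrs

theorem reach_insert_merge {p : PySem.Dict TT TT} {l w : TT}
    (hl : UFRoot p l) (hw : UFRoot p w) (hlw : l ≠ w) :
    ∀ {y s : TT}, UFReach p y s → UFReach (p.insert l w) y (if s = l then w else s) := by
  intro y s hys
  obtain ⟨hpys, hrs⟩ := hys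
  have hwne : w ≠ l := fun h => hlw h.symm
  have hrootw : UFRoot (p.insert l w) w := by
    show pstep _ w = w
    rw [pstep_insert, if_neg hwne]
    exact hw
  have hroot' : UFRoot (p.insert l w) (if s = l then w else s) := by
    by_cases hsl : s = l
    · rw [if_pos hsl]; exact hrootw
    · rw [if_neg hsl]
      show pstep _ s = s
      rw [pstep_insert, if_neg hsl]
      exact hrs
  refine ⟨?_, hroot'⟩
  have hpathl : UFPath (p.insert l w) l w := by
    have hps : pstep (p.insert l w) l = w := by rw [pstep_insert]; simp
    refine UFPath.step ?_ ?_
    · rw [hps]; exact hwne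
    · rw [hps]; exact UFPath.refl w
  have hpath : ∀ {a b : TT}, UFPath p a b → UFPath (p.insert l w) a (if b = l then w else b) := by
    intro a b hab
    induction hab with
    | refl c =>
      by_cases hcl : c = l
      · rw [if_pos hcl]; exact hcl ▸ hpathl
      · rw [if_neg hcl]; exact UFPath.refl c
    | @step a' r' hne hnext ih =>
      have hal : a' ≠ l := by
        intro h; subst h; exact hne hl
      have hps : pstep (p.insert l w) a' = pstep p a' := by rw [pstep_insert, if_neg hal]
      refine UFPath.step ?_ ?_
      · rw [hps]; exact hne
      · rw [hps]; exact ih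
  exact hpath hpys

-- ---- ufFind / ufFindTop specification ----
theorem ufFind_spec : ∀ (k fuel : Nat) (uf : UF) (x r : TT),
    UFPathN uf.parent x r k → UFRoot uf.parent r → k ≤ fuel →
    (ufFind fuel uf x).2 = r ∧
    (ufFind fuel uf x).1.size = uf.size ∧
    (ufFind fuel uf x).1.rank = uf.rank ∧
    (ufFind fuel uf x).1.parent.keys = uf.parent.keys ∧
    (∀ y s, UFReach uf.parent y s → UFReach (ufFind fuel uf x).1.parent y s) ∧
    (∀ z, pstep (ufFind fuel uf x).1.parent z = pstep uf.parent z ∨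
          ∃ s, UFReach uf.parent z s ∧ pstep (ufFind fuel uf x).1.parent z = s) := by
  intro k
  induction k with
  | zero =>
    intro fuel uf x r h hr hf
    have hrx : r = x := by cases h; rfl
    subst hrx
    cases fuel with
    | zero =>
      exact ⟨rfl, rfl, rfl, rfl, fun y s hs => hs, fun z => Or.inl rfl⟩
    | succ m =>
      have heq : ufFind (m + 1) uf r = (uf, r) := by
        simp only [ufFind]
        rw [if_neg (fun hcon => hcon hr), show uf.parent.getD r r = r from hr]
      rw [heq]
      exact ⟨rfl, rfl, rfl, rfl, fun y s hs => hs, fun z => Or.inl rfl⟩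
  | succ k ih =>
    intro fuel uf x r h hr hf
    cases h with
    | step hne hnext =>
      cases fuel with
      | zero => omega
      | succ m =>
        have hne' : uf.parent.getD x x ≠ x := hne
        simp only [ufFind]
        rw [if_pos hne']
        obtain ⟨h2, hsz, hrk, hks, hpres, hdisj⟩ :=
          ih m uf (uf.parent.getD x x) r hnext hr (by omega)
        have hreachxr : UFReach uf.parent x r := ⟨UFPath.step hne (path_of_pathN hnext), hr⟩
        have hreach1 : UFReach (ufFind m uf (uf.parent.getD x x)).1.parent x r :=
          hpres x r hreachxr
        have hcontains : (ufFind m uf (uf.parent.getD x x)).1.parent.contains x = true := by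
          rw [PySem.Dict.contains_iff_mem_keys, hks, ← PySem.Dict.contains_iff_mem_keys]
          exact contains_of_pstep_ne hne
        have hget2 : ((ufFind m uf (uf.parent.getD x x)).1.parent.insert x
            (ufFind m uf (uf.parent.getD x x)).2).getD x x = (ufFind m uf (uf.parent.getD x x)).2 :=
          PySem.Dict.getD_insert_self _ _ _ _
        refine ⟨?_, ?_, ?_, ?_, ?_, ?_⟩
        · exact hget2.trans h2
        · exact hsz
        · exact hrk
        · exact (PySem.Dict.keys_insert_of_contains _ _ hcontains).trans hks
        · intro y s hs
          have hs1 := hpres y s hs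
          have hx2 : UFReach (ufFind m uf (uf.parent.getD x x)).1.parent x
              (ufFind m uf (uf.parent.getD x x)).2 := by
            rw [h2]; exact hreach1
          exact reach_insert_root hx2 hs1
        · intro z
          by_cases hzx : z = x
          · subst hzx
            refine Or.inr ⟨r, hreachxr, ?_⟩
            rw [pstep_insert, if_pos rfl, h2]
          · have hst : pstep ((ufFind m uf (uf.parent.getD x x)).1.parent.insert x
                (ufFind m uf (uf.parent.getD x x)).2) z
                = pstep (ufFind m uf (uf.parent.getD x x)).1.parent z := by
              rw [pstep_insert, if_neg hzx]
            rw [hst]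
            exact hdisj z

-- ---- the ghost-root invariant tying A's state to a partition ----
def UFInv (uf : UF) (f : TT → TT) (C : List TT) : Prop :=
  uf.parent.keys = C ∧
  (∀ z ∈ C, pstep uf.parent z ∈ C) ∧
  (∀ x ∈ C, UFReach uf.parent x (f x)) ∧
  (∀ x ∈ C, uf.size.getD (f x) 0 = ((C.filter (fun y => f y = f x)).length : Int))

theorem inv_f_mem {uf : UF} {f : TT → TT} {C : List TT} (h : UFInv uf f C) {x : TT} (hx : x ∈ C) :
    f x ∈ C := path_mem (h.2.2.1 x hx).1 hx h.2.1

theorem inv_f_root {uf : UF} {f : TT → TT} {C : List TT} (h : UFInv uf f C) {x : TT} (hx : x ∈ C) :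
    UFRoot uf.parent (f x) := (h.2.2.1 x hx).2

theorem inv_f_idem {uf : UF} {f : TT → TT} {C : List TT} (h : UFInv uf f C) {x : TT} (hx : x ∈ C) :
    f (f x) = f x := by
  have h1 := h.2.2.1 (f x) (inv_f_mem h hx)
  have h2 := inv_f_root h hx
  exact reach_unique h1.1 h1.2 (UFPath.refl _) h2

theorem ufFindTop_spec {uf : UF} {f : TT → TT} {C : List TT} {x : TT}
    (hinv : UFInv uf f C) (hC : C.Nodup) (hx : x ∈ C) :
    (ufFindTop uf x).2 = f x ∧ UFInv (ufFindTop uf x).1 f C ∧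
    (ufFindTop uf x).1.size = uf.size ∧ (ufFindTop uf x).1.rank = uf.rank := by
  obtain ⟨hkeys, hcl, hreach, hsz⟩ := hinv
  obtain ⟨hpath, hroot⟩ := hreach x hx
  obtain ⟨k, hkN⟩ := pathN_of_path hpath
  have hklt : k < C.length := pathN_lt_of_nodup hC hx hcl hkN hroot
  have hkeylen : uf.parent.keys.length = uf.parent.items.length := by
    show (uf.parent.items.map (fun kv => kv.1)).length = _
    exact List.length_map _
  have hfuel : k ≤ uf.parent.items.length + 1 := by
    have : uf.parent.keys.length = C.length := by rw [hkeys]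
    omega
  obtain ⟨h2, hszeq, hrkeq, hkseq, hpres, hdisj⟩ :=
    ufFind_spec k _ uf x (f x) hkN hroot hfuel
  unfold ufFindTop
  refine ⟨h2, ⟨hkseq.trans hkeys, ?_, ?_, ?_⟩, hszeq, hrkeq⟩
  · intro z hz
    rcases hdisj z with heq | ⟨s, hs, heq⟩
    · rw [heq]; exact hcl z hz
    · rw [heq]; exact path_mem hs.1 hz hcl
  · intro x' hx'
    exact hpres x' (f x') (⟨(hreach x' hx').1, (hreach x' hx').2⟩)
  · intro x' hx'
    rw [hszeq]
    exact hsz x' hx'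

-- ---- merging ----
theorem countP_or_ne {α : Type} (l : List α) (p q : α → Prop) [DecidablePred p] [DecidablePred q]
    (h : ∀ x, p x → q x → False) :
    l.countP (fun x => decide (p x ∨ q x)) =
      l.countP (fun x => decide (p x)) + l.countP (fun x => decide (q x)) := by
  induction l with
  | nil => simp
  | cons a t ih =>
    simp only [List.countP_cons, ih]
    by_cases hp : p a <;> by_cases hq : q a
    · exact absurd (h a hp hq) (fun f => f)
    all_goals (simp [hp, hq]; try omega)

theorem mergef_char {f : TT → TT} {w l : TT} (hlw : l ≠ w) (x y : TT) :
    ((if f x = l then w else f x) = (if f y = l then w else f y)) ↔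
      (f x = f y ∨ ((f x = l ∨ f x = w) ∧ (f y = l ∨ f y = w))) := by
  constructor
  · intro h
    by_cases hx : f x = l
    · by_cases hy : f y = l
      · exact Or.inl (hx.trans hy.symm)
      · rw [if_pos hx, if_neg hy] at h
        exact Or.inr ⟨Or.inl hx, Or.inr h.symm⟩
    · by_cases hy : f y = l
      · rw [if_neg hx, if_pos hy] at h
        exact Or.inr ⟨Or.inr h, Or.inl hy⟩
      · rw [if_neg hx, if_neg hy] at h
        exact Or.inl h
  · intro h
    rcases h with h | ⟨hx, hy⟩
    · rw [h]
    · have ex : (if f x = l then w else f x) = w := by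
        rcases hx with hx | hx
        · rw [if_pos hx]
        · rw [if_neg (fun hh => hlw (hh.symm.trans hx)), hx]
      have ey : (if f y = l then w else f y) = w := by
        rcases hy with hy | hy
        · rw [if_pos hy]
        · rw [if_neg (fun hh => hlw (hh.symm.trans hy)), hy]
      rw [ex, ey]

theorem merge_inv {ufb : UF} {f : TT → TT} {C : List TT} {w l : TT}
    (hinv : UFInv ufb f C) (hC : C.Nodup) (hw : w ∈ C) (hl : l ∈ C)
    (hwr : f w = w) (hlr : f l = l) (hlw : l ≠ w) (rk : PySem.Dict TT Int) :
    UFInv ⟨ufb.parent.insert l w,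
         ufb.size.insert w (ufb.size.getD w 0 + ufb.size.getD l 0), rk⟩
      (fun z => if f z = l then w else f z) C := by
  obtain ⟨hkeys, hcl, hreach, hsz⟩ := hinv
  have hwr' : UFRoot ufb.parent w := by
    have := (hreach w hw).2
    rwa [hwr] at this
  have hlr' : UFRoot ufb.parent l := by
    have := (hreach l hl).2
    rwa [hlr] at this
  have hcontl : ufb.parent.contains l = true := by
    rw [PySem.Dict.contains_iff_mem_keys, hkeys]; exact hl
  refine ⟨?_, ?_, ?_, ?_⟩
  · exact (PySem.Dict.keys_insert_of_contains _ _ hcontl).trans hkeys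
  · intro z hz
    rw [pstep_insert]
    by_cases hzl : z = l
    · rw [if_pos hzl]; exact hw
    · rw [if_neg hzl]; exact hcl z hz
  · intro x hx
    exact reach_insert_merge hlr' hwr' hlw (hreach x hx)
  · intro x hx
    simp only []
    by_cases hfx : f x = l ∨ f x = w
    · have hfx' : (if f x = l then w else f x) = w := by
        rcases hfx with h | h
        · rw [if_pos h]
        · rw [if_neg (fun hh => hlw (hh.symm.trans h)), h]
      simp only [hfx', PySem.Dict.getD_insert_self]
      have e1 := hsz w hw
      rw [hwr] at e1
      have e2 := hsz l hl
      rw [hlr] at e2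
      rw [e1, e2]
      have hcong : ∀ y ∈ C,
          (decide ((if f y = l then w else f y) = w)) = (decide (f y = w ∨ f y = l)) := by
        intro y _
        by_cases hyl : f y = l
        · simp [hyl, fun hh : l = w => hlw hh]
        · simp [hyl]
      have hfeq : C.filter (fun y => decide ((if f y = l then w else f y) = w))
          = C.filter (fun y => decide (f y = w ∨ f y = l)) :=
        List.filter_congr (fun y hy => hcong y hy)
      rw [hfeq]
      have hsplit : (C.filter (fun y => decide (f y = w ∨ f y = l))).length
          = (C.filter (fun y => decide (f y = w))).length
            + (C.filter (fun y => decide (f y = l))).length := by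
        rw [← List.countP_eq_length_filter, ← List.countP_eq_length_filter,
          ← List.countP_eq_length_filter]
        exact countP_or_ne C (fun y => f y = w) (fun y => f y = l)
          (fun y hyw hyl => hlw (hyl.symm.trans hyw))
      rw [hsplit]
      push_cast
      ring
    · push_neg at hfx
      have hfx' : (if f x = l then w else f x) = f x := if_neg hfx.1
      have hgg : (ufb.size.insert w (ufb.size.getD w 0 + ufb.size.getD l 0)).getD (f x) 0
          = ufb.size.getD (f x) 0 := by
        rw [PySem.Dict.getD_insert]
        exact if_neg hfx.2
      simp only [hfx', hgg, hsz x hx]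
      congr 2
      apply List.filter_congr
      intro y _
      by_cases hyl : f y = l
      · simp only [if_pos hyl]
        have h1 : ¬ (w = f x) := fun h => hfx.2 h.symm
        have h2 : ¬ (f y = f x) := by rw [hyl]; exact fun h => hfx.1 h.symm
        simp [h1, h2]
      · simp [if_neg hyl]

theorem ufUnion_spec_eq {uf : UF} {f : TT → TT} {C : List TT} {b1 b2 : TT}
    (hinv : UFInv uf f C) (hC : C.Nodup) (h1 : b1 ∈ C) (h2 : b2 ∈ C) (heq : f b1 = f b2) :
    UFInv (ufUnion uf b1 b2) f C := by
  obtain ⟨hf1, hinv1, hsz1, hrk1⟩ := ufFindTop_spec hinv hC h1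
  obtain ⟨hf2, hinv2, hsz2, hrk2⟩ := ufFindTop_spec hinv1 hC h2
  have hcond : (ufFindTop uf b1).2 = (ufFindTop (ufFindTop uf b1).1 b2).2 := by
    rw [hf1, hf2, heq]
  simp only [ufUnion]
  rw [if_pos hcond]
  exact hinv2

set_option maxHeartbeats 1000000 in
theorem ufUnion_spec_ne {uf : UF} {f : TT → TT} {C : List TT} {b1 b2 : TT}
    (hinv : UFInv uf f C) (hC : C.Nodup) (h1 : b1 ∈ C) (h2 : b2 ∈ C) (hne : f b1 ≠ f b2) :
    ∃ f', UFInv (ufUnion uf b1 b2) f' C ∧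
      (∀ x y : TT, (f' x = f' y ↔
        (f x = f y ∨ ((f x = f b1 ∨ f x = f b2) ∧ (f y = f b1 ∨ f y = f b2))))) := by
  obtain ⟨hf1, hinv1, hsz1, hrk1⟩ := ufFindTop_spec hinv hC h1
  obtain ⟨hf2, hinv2, hsz2, hrk2⟩ := ufFindTop_spec hinv1 hC h2
  have hcond : ¬ ((ufFindTop uf b1).2 = (ufFindTop (ufFindTop uf b1).1 b2).2) := by
    rw [hf1, hf2]; exact hne
  have hb1m : f b1 ∈ C := inv_f_mem hinv h1
  have hb2m : f b2 ∈ C := inv_f_mem hinv h2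
  have hid1 : f (f b1) = f b1 := inv_f_idem hinv h1
  have hid2 : f (f b2) = f b2 := inv_f_idem hinv h2
  simp only [ufUnion]
  rw [if_neg hcond]
  set ufb := (ufFindTop (ufFindTop uf b1).1 b2).1 with hufb
  rw [hf1, hf2]
  by_cases hrank1 : ufb.rank.getD (f b1) 0 > ufb.rank.getD (f b2) 0
  · rw [if_pos hrank1]
    refine ⟨fun z => if f z = f b2 then f b1 else f z, ?_, ?_⟩
    · exact merge_inv (ufb := ufb) (f := f) (C := C) (w := f b1) (l := f b2)
        hinv2 hC hb1m hb2m hid1 hid2 hne.symm ufb.rank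
    · intro x y
      rw [mergef_char hne.symm x y]
      tauto
  · rw [if_neg hrank1]
    by_cases hrank2 : ufb.rank.getD (f b2) 0 > ufb.rank.getD (f b1) 0
    · rw [if_pos hrank2]
      refine ⟨fun z => if f z = f b1 then f b2 else f z, ?_, ?_⟩
      · exact merge_inv (ufb := ufb) (f := f) (C := C) (w := f b2) (l := f b1)
          hinv2 hC hb2m hb1m hid2 hid1 hne ufb.rank
      · intro x y
        rw [mergef_char hne x y]
    · rw [if_neg hrank2]
      refine ⟨fun z => if f z = f b1 then f b2 else f z, ?_, ?_⟩
      · exact merge_inv (ufb := ufb) (f := f) (C := C) (w := f b2) (l := f b1)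
          hinv2 hC hb2m hb1m hid2 hid1 hne
          (ufb.rank.insert (f b2) (ufb.rank.getD (f b2) 0 + 1))
      · intro x y
        rw [mergef_char hne x y]

theorem stop_iff {uf : UF} {f : TT → TT} {C : List TT} {b1 : TT}
    (hinv : UFInv uf f C) (hb1 : b1 ∈ C) :
    (uf.size.getD (f b1) 0 = PySem.List.len C) ↔ (∀ y ∈ C, f y = f b1) := by
  rw [hinv.2.2.2 b1 hb1, PySem.List.len_eq]
  constructor
  · intro h
    have hlen : (C.filter (fun y => decide (f y = f b1))).length = C.length := by
      exact_mod_cast h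
    have := List.length_filter_eq_length_iff.mp hlen
    intro y hy
    simpa using this y hy
  · intro h
    have hlen : (C.filter (fun y => decide (f y = f b1))).length = C.length :=
      List.length_filter_eq_length_iff.mpr (fun y hy => by simp [h y hy])
    exact_mod_cast congrArg (Nat.cast : Nat → Int) hlen

-- ---- B-side dict lemmas ----
theorem foldl_insert_get?_not_mem {ν : Type} (g : TT → ν) :
    ∀ (C : List TT) (d : PySem.Dict TT ν) (x : TT), x ∉ C →
      (C.foldl (fun d b => d.insert b (g b)) d).get? x = d.get? x := by
  intro C
  induction C with
  | nil => intro d x _; rfl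
  | cons c t ih =>
    intro d x hx
    simp only [List.foldl_cons]
    rw [ih _ x (fun h => hx (List.mem_cons_of_mem _ h))]
    exact PySem.Dict.get?_insert_of_ne _ _ (fun h => hx (h ▸ List.mem_cons_self))

theorem foldl_insert_get?_mem {ν : Type} (g : TT → ν) :
    ∀ (C : List TT) (d : PySem.Dict TT ν) (x : TT), x ∈ C →
      (C.foldl (fun d b => d.insert b (g b)) d).get? x = some (g x) := by
  intro C
  induction C with
  | nil => intro d x hx; simp at hx
  | cons c t ih =>
    intro d x hx
    simp only [List.foldl_cons]
    by_cases hxt : x ∈ t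
    · exact ih _ x hxt
    · have hxc : x = c := by
        rcases List.mem_cons.mp hx with h | h
        · exact h
        · exact absurd h hxt
      subst hxc
      rw [foldl_insert_get?_not_mem g t _ x hxt]
      exact PySem.Dict.get?_insert_self _ _ _

theorem compB_keys (C : List TT) (hC : C.Nodup) : (compB C).keys = C := by
  unfold compB
  rw [PySem.Dict.keys_foldl_insert (f := fun _ b => b)]
  simp only [PySem.Dict.keys_empty]
  rw [PySem.Set.update_nil_left]
  exact PySem.Set.ofList_eq_self_of_nodup C hC

theorem compB_getD (C : List TT) {x : TT} (hx : x ∈ C) (d : TT) : (compB C).getD x d = x :=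
  PySem.Dict.getD_of_get?_eq_some _ _ (foldl_insert_get?_mem (fun b => b) C _ x hx)

theorem relabelB_items (comp : PySem.Dict TT TT) (hnd : comp.keys.Nodup) (c2 c1 : TT) :
    (relabelB comp c2 c1).items =
      comp.items.map (fun kv => (kv.1, if kv.2 = c2 then c1 else kv.2)) := by
  unfold relabelB
  have h := PySem.Dict.items_foldl_insert_fresh (l := comp.items)
    (k := fun kv : TT × TT => kv.1) (v := fun kv : TT × TT => if kv.2 = c2 then c1 else kv.2)
    (d := (PySem.Dict.empty : PySem.Dict TT TT))
    (fun a _ => by simp [PySem.Dict.contains_empty]) hnd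
  simpa using h

theorem relabelB_keys (comp : PySem.Dict TT TT) (hnd : comp.keys.Nodup) (c2 c1 : TT) :
    (relabelB comp c2 c1).keys = comp.keys := by
  show ((relabelB comp c2 c1).items.map (fun kv => kv.1)) = comp.items.map (fun kv => kv.1)
  rw [relabelB_items comp hnd c2 c1, List.map_map]
  rfl

theorem relabelB_getD (comp : PySem.Dict TT TT) (hnd : comp.keys.Nodup) {x : TT}
    (hx : x ∈ comp.keys) (c2 c1 d d' : TT) :
    (relabelB comp c2 c1).getD x d = if comp.getD x d' = c2 then c1 else comp.getD x d' := by
  obtain ⟨v, hv⟩ : ∃ v, comp.get? x = some v := by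
    cases hq : comp.get? x with
    | none => exact absurd ((PySem.Dict.get?_eq_none_iff_not_mem_keys comp x).mp hq) (not_not_intro hx)
    | some v => exact ⟨v, rfl⟩
  have hm : (x, v) ∈ comp.items := (PySem.Dict.get?_eq_some_iff_mem_items comp x v hnd).mp hv
  have hm' : (x, if v = c2 then c1 else v) ∈ (relabelB comp c2 c1).items := by
    rw [relabelB_items comp hnd c2 c1]
    exact List.mem_map.mpr ⟨(x, v), hm, rfl⟩
  have hnd' : (relabelB comp c2 c1).keys.Nodup := by
    rw [relabelB_keys comp hnd c2 c1]; exact hnd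
  rw [PySem.Dict.getD_of_mem_items _ hm' hnd',
    PySem.Dict.getD_of_get?_eq_some _ _ hv]

theorem relabelB_values_all (comp : PySem.Dict TT TT) (hnd : comp.keys.Nodup) (c2 c1 : TT) :
    ((relabelB comp c2 c1).values.all (fun c => c == c1) = true) ↔
      ∀ x ∈ comp.keys, (if comp.getD x x = c2 then c1 else comp.getD x x) = c1 := by
  have hvals : (relabelB comp c2 c1).values
      = comp.items.map (fun kv => if kv.2 = c2 then c1 else kv.2) := by
    show ((relabelB comp c2 c1).items.map (fun kv => kv.2)) = _
    rw [relabelB_items comp hnd c2 c1, List.map_map]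
    rfl
  rw [hvals, List.all_eq_true]
  constructor
  · intro h x hxk
    obtain ⟨v, hv⟩ : ∃ v, comp.get? x = some v := by
      cases hq : comp.get? x with
      | none => exact absurd ((PySem.Dict.get?_eq_none_iff_not_mem_keys comp x).mp hq) (not_not_intro hxk)
      | some v => exact ⟨v, rfl⟩
    have hm : (x, v) ∈ comp.items := (PySem.Dict.get?_eq_some_iff_mem_items comp x v hnd).mp hv
    have := h _ (List.mem_map.mpr ⟨(x, v), hm, rfl⟩)
    rw [PySem.Dict.getD_of_get?_eq_some _ _ hv]
    simpa using this
  · intro h b hb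
    obtain ⟨kv, hkv, rfl⟩ := List.mem_map.mp hb
    have hk : kv.1 ∈ comp.keys := PySem.Dict.mem_keys_of_mem_items _ hkv
    have hgd : comp.getD kv.1 kv.1 = kv.2 := PySem.Dict.getD_of_mem_items _ hkv hnd _
    have := h kv.1 hk
    rw [hgd] at this
    simpa using this

-- ---- initial states ----
theorem ufInit_eq (C : List TT) :
    ufInit C = ⟨C.foldl (fun d b => d.insert b b) PySem.Dict.empty,
                C.foldl (fun d b => d.insert b 1) PySem.Dict.empty,
                C.foldl (fun d b => d.insert b 0) PySem.Dict.empty⟩ := by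
  have key : ∀ (L : List TT) (p : PySem.Dict TT TT) (s r : PySem.Dict TT Int),
      L.foldl (fun uf box =>
        { parent := uf.parent.insert box box,
          size := uf.size.insert box 1,
          rank := uf.rank.insert box 0 }) (⟨p, s, r⟩ : UF)
      = ⟨L.foldl (fun d b => d.insert b b) p,
         L.foldl (fun d b => d.insert b 1) s,
         L.foldl (fun d b => d.insert b 0) r⟩ := by
    intro L
    induction L with
    | nil => intro p s r; rfl
    | cons c t ih =>
      intro p s r
      simp only [List.foldl_cons]
      exact ih _ _ _
  exact key C _ _ _

theorem ufInit_inv (C : List TT) (hC : C.Nodup) : UFInv (ufInit C) (fun x => x) C := by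
  rw [ufInit_eq]
  have hkeys : (C.foldl (fun d b => d.insert b b) (PySem.Dict.empty : PySem.Dict TT TT)).keys
      = C := by
    rw [PySem.Dict.keys_foldl_insert (f := fun _ b => b)]
    simp only [PySem.Dict.keys_empty]
    rw [PySem.Set.update_nil_left]
    exact PySem.Set.ofList_eq_self_of_nodup C hC
  have hpar : ∀ z ∈ C,
      pstep (C.foldl (fun d b => d.insert b b) (PySem.Dict.empty : PySem.Dict TT TT)) z = z := by
    intro z hz
    show PySem.Dict.getD _ z z = z
    rw [PySem.Dict.getD_of_get?_eq_some _ _ (foldl_insert_get?_mem (fun b => b) C _ z hz)]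
  refine ⟨hkeys, ?_, ?_, ?_⟩
  · intro z hz
    rw [hpar z hz]
    exact hz
  · intro x hx
    exact ⟨UFPath.refl x, hpar x hx⟩
  · intro x hx
    show PySem.Dict.getD _ x 0 = _
    rw [PySem.Dict.getD_of_get?_eq_some _ _
      (foldl_insert_get?_mem (fun _ => (1 : Int)) C _ x hx)]
    have hcnt : (C.filter (fun y => decide (y = x))).length = 1 := by
      rw [← List.countP_eq_length_filter]
      have : C.countP (fun y => decide (y = x)) = C.count x := by
        rw [List.count_eq_countP]
        exact List.countP_congr (fun y _ => by simp)
      rw [this]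
      exact List.count_eq_one_of_mem hC hx
    rw [hcnt]
    rfl

-- ---- the main loop bridge ----
set_option maxHeartbeats 2000000 in
theorem loop_bridge (C : List TT) (hC : C.Nodup) :
    ∀ (edges : List EE) (uf : UF) (comp : PySem.Dict TT TT) (f : TT → TT),
      UFInv uf f C → comp.keys = C →
      (∀ x y : TT, x ∈ C → y ∈ C → (f x = f y ↔ comp.getD x x = comp.getD y y)) →
      (∃ x, x ∈ C ∧ ∃ y, y ∈ C ∧ f x ≠ f y) →
      (∀ e ∈ edges, e.2.1 ∈ C ∧ e.2.2 ∈ C) →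
      loopUF edges uf (PySem.List.len C) = loopC edges comp := by
  intro edges
  induction edges with
  | nil => intro uf comp f _ _ _ _ _; rfl
  | cons e rest ih =>
    intro uf comp f hinv hkeys hcorr hH4 hends
    obtain ⟨hb1, hb2⟩ := hends e List.mem_cons_self
    have hndk : comp.keys.Nodup := by rw [hkeys]; exact hC
    have hcc : (f e.2.1 = f e.2.2) ↔ (comp.getD e.2.1 e.2.1 = comp.getD e.2.2 e.2.2) :=
      hcorr _ _ hb1 hb2
    have hendsrest : ∀ e' ∈ rest, e'.2.1 ∈ C ∧ e'.2.2 ∈ C :=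
      fun e' he' => hends e' (List.mem_cons_of_mem _ he')
    by_cases hf12 : f e.2.1 = f e.2.2
    · -- no merge on either side
      have hceq : comp.getD e.2.1 e.2.1 = comp.getD e.2.2 e.2.2 := hcc.mp hf12
      have hInv1 : UFInv (ufUnion uf e.2.1 e.2.2) f C := ufUnion_spec_eq hinv hC hb1 hb2 hf12
      obtain ⟨hfind2, hfindInv, hfindsz, _⟩ := ufFindTop_spec hInv1 hC hb1
      have hstop : ¬ ((ufFindTop (ufUnion uf e.2.1 e.2.2) e.2.1).1.size.getD
          ((ufFindTop (ufUnion uf e.2.1 e.2.2) e.2.1).2) 0 = PySem.List.len C) := by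
        rw [hfind2, hfindsz, stop_iff hInv1 hb1]
        intro hall
        obtain ⟨x, hxC, y, hyC, hxy⟩ := hH4
        exact hxy ((hall x hxC).trans (hall y hyC).symm)
      simp only [loopUF, loopC]
      rw [if_neg hstop, if_neg (not_not_intro hceq)]
      exact ih _ comp f hfindInv hkeys hcorr hH4 hendsrest
    · -- merging edge
      have hcne : comp.getD e.2.1 e.2.1 ≠ comp.getD e.2.2 e.2.2 := fun h => hf12 (hcc.mpr h)
      obtain ⟨f', hInv1, hchar⟩ := ufUnion_spec_ne hinv hC hb1 hb2 hf12
      obtain ⟨hfind2, hfindInv, hfindsz, _⟩ := ufFindTop_spec hInv1 hC hb1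
      have hstopA : ((ufFindTop (ufUnion uf e.2.1 e.2.2) e.2.1).1.size.getD
          ((ufFindTop (ufUnion uf e.2.1 e.2.2) e.2.1).2) 0 = PySem.List.len C)
          ↔ (∀ y ∈ C, f y = f e.2.1 ∨ f y = f e.2.2) := by
        rw [hfind2, hfindsz, stop_iff hInv1 hb1]
        refine forall_congr' (fun y => forall_congr' (fun hy => ?_))
        rw [hchar y e.2.1]
        constructor
        · rintro (h | ⟨h, _⟩)
          · exact Or.inl h
          · exact h
        · rintro (h | h)
          · exact Or.inl h
          · exact Or.inr ⟨Or.inr h, Or.inl rfl⟩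
      have hgetD' : ∀ x ∈ C, (relabelB comp (comp.getD e.2.2 e.2.2) (comp.getD e.2.1 e.2.1)).getD x x
          = if comp.getD x x = comp.getD e.2.2 e.2.2 then comp.getD e.2.1 e.2.1
            else comp.getD x x :=
        fun x hx => relabelB_getD comp hndk (by rw [hkeys]; exact hx) _ _ x x
      have hstopB : ((relabelB comp (comp.getD e.2.2 e.2.2) (comp.getD e.2.1 e.2.1)).values.all
            (fun c => c == comp.getD e.2.1 e.2.1) = true)
          ↔ (∀ y ∈ C, f y = f e.2.1 ∨ f y = f e.2.2) := by
        rw [relabelB_values_all comp hndk _ _, hkeys]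
        refine forall_congr' (fun y => forall_congr' (fun hy => ?_))
        have h1 : comp.getD y y = comp.getD e.2.1 e.2.1 ↔ f y = f e.2.1 :=
          (hcorr y e.2.1 hy hb1).symm
        have h2 : comp.getD y y = comp.getD e.2.2 e.2.2 ↔ f y = f e.2.2 :=
          (hcorr y e.2.2 hy hb2).symm
        by_cases hyc : comp.getD y y = comp.getD e.2.2 e.2.2
        · rw [if_pos hyc]
          constructor
          · intro _; exact Or.inr (h2.mp hyc)
          · intro _; rfl
        · rw [if_neg hyc]
          constructor
          · intro h; exact Or.inl (h1.mp h)
          · rintro (h | h)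
            · exact h1.mpr h
            · exact absurd (h2.mpr h) hyc
      simp only [loopUF, loopC]
      rw [if_pos hcne]
      by_cases hstop : ∀ y ∈ C, f y = f e.2.1 ∨ f y = f e.2.2
      · rw [if_pos (hstopA.mpr hstop), if_pos (hstopB.mpr hstop)]
      · rw [if_neg (fun h => hstop (hstopA.mp h)), if_neg (fun h => hstop (hstopB.mp h))]
        refine ih _ _ f' hfindInv ?_ ?_ ?_ hendsrest
        · rw [relabelB_keys comp hndk]; exact hkeys
        · intro x y hx hy
          rw [hgetD' x hx, hgetD' y hy, hchar x y]
          rw [mergef_char (f := fun z => comp.getD z z) (Ne.symm hcne) x y]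
          have e1 : f x = f y ↔ comp.getD x x = comp.getD y y := hcorr x y hx hy
          have e2 : f x = f e.2.1 ↔ comp.getD x x = comp.getD e.2.1 e.2.1 := hcorr x e.2.1 hx hb1
          have e3 : f x = f e.2.2 ↔ comp.getD x x = comp.getD e.2.2 e.2.2 := hcorr x e.2.2 hx hb2
          have e4 : f y = f e.2.1 ↔ comp.getD y y = comp.getD e.2.1 e.2.1 := hcorr y e.2.1 hy hb1
          have e5 : f y = f e.2.2 ↔ comp.getD y y = comp.getD e.2.2 e.2.2 := hcorr y e.2.2 hy hb2
          rw [e1, e2, e3, e4, e5]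
          constructor
          · rintro (h | ⟨h1, h2⟩)
            · exact Or.inl h
            · exact Or.inr ⟨h1.symm, h2.symm⟩
          · rintro (h | ⟨h1, h2⟩)
            · exact Or.inl h
            · exact Or.inr ⟨h1.symm, h2.symm⟩
        · have hnotall : ¬ ∀ y ∈ C, f' y = f' e.2.1 := by
            intro hall
            apply hstop
            intro y hy
            have := hall y hy
            rw [hchar y e.2.1] at this
            rcases this with h | ⟨h, _⟩
            · exact Or.inl h
            · exact h
          push_neg at hnotall
          obtain ⟨y, hy, hne'⟩ := hnotall
          exact ⟨y, hy, e.2.1, hb1, hne'⟩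

-- ---- the two edge lists coincide ----
theorem idxFlat (C : List TT) :
    ((PySem.List.pyRange 0 (PySem.List.len C - 1) 1).foldl (fun es i =>
      (PySem.List.pyRange (i + 1) (PySem.List.len C) 1).foldl (fun es j =>
        let b1 := PySem.List.pyGetD C i dB
        let b2 := PySem.List.pyGetD C j dB
        es ++ [(dist2 b1 b2, b1, b2)]) es) ([] : List EE))
      = (PySem.List.pyRange 0 (PySem.List.len C - 1) 1).flatMap (fun i =>
          (PySem.List.pyRange (i + 1) (PySem.List.len C) 1).map (fun j =>
            (dist2 (PySem.List.pyGetD C i dB) (PySem.List.pyGetD C j dB),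
              PySem.List.pyGetD C i dB, PySem.List.pyGetD C j dB))) := by
  have hinner1 : ∀ (i : Int) (es : List EE),
      (PySem.List.pyRange (i + 1) (PySem.List.len C) 1).foldl (fun es j =>
        es ++ [(dist2 (PySem.List.pyGetD C i dB) (PySem.List.pyGetD C j dB),
          PySem.List.pyGetD C i dB, PySem.List.pyGetD C j dB)]) es
      = es ++ (PySem.List.pyRange (i + 1) (PySem.List.len C) 1).map (fun j =>
          (dist2 (PySem.List.pyGetD C i dB) (PySem.List.pyGetD C j dB),
            PySem.List.pyGetD C i dB, PySem.List.pyGetD C j dB)) := by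
    intro i es
    exact PySem.List.foldl_append_singleton_eq_map _ _ _
  rw [show (fun (es : List EE) (i : Int) =>
      (PySem.List.pyRange (i + 1) (PySem.List.len C) 1).foldl (fun es j =>
        let b1 := PySem.List.pyGetD C i dB
        let b2 := PySem.List.pyGetD C j dB
        es ++ [(dist2 b1 b2, b1, b2)]) es)
      = (fun es i => es ++ (PySem.List.pyRange (i + 1) (PySem.List.len C) 1).map (fun j =>
          (dist2 (PySem.List.pyGetD C i dB) (PySem.List.pyGetD C j dB),
            PySem.List.pyGetD C i dB, PySem.List.pyGetD C j dB)))
    from funext fun es => funext fun i => hinner1 i es]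
  rw [PySem.List.foldl_append_eq_flatMap]
  simp

theorem idxList_eq_calc (C : List TT) :
    ((PySem.List.pyRange 0 (PySem.List.len C - 1) 1).foldl (fun es i =>
      (PySem.List.pyRange (i + 1) (PySem.List.len C) 1).foldl (fun es j =>
        let b1 := PySem.List.pyGetD C i dB
        let b2 := PySem.List.pyGetD C j dB
        es ++ [(dist2 b1 b2, b1, b2)]) es) ([] : List EE))
      = calcDistances C := by
  unfold calcDistances
  rw [PySem.List.slice_to_neg_one, idxFlat]
  have hinner2 : ∀ (p : Int × TT) (ds : List EE),
      (PySem.List.slice C (some (p.1 + 1)) none).foldl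
        (fun ds box2 => ds ++ [(dist2 p.2 box2, p.2, box2)]) ds
      = ds ++ (PySem.List.slice C (some (p.1 + 1)) none).map
          (fun box2 => (dist2 p.2 box2, p.2, box2)) := by
    intro p ds
    exact PySem.List.foldl_append_singleton_eq_map _ _ _
  have h2 : (PySem.List.enumerate C.dropLast 0).foldl
      (fun distances p =>
        (PySem.List.slice C (some (p.1 + 1)) none).foldl
          (fun ds box2 => ds ++ [(dist2 p.2 box2, p.2, box2)]) distances) []
      = (PySem.List.enumerate C.dropLast 0).flatMap (fun p =>
          (PySem.List.slice C (some (p.1 + 1)) none).map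
            (fun box2 => (dist2 p.2 box2, p.2, box2))) := by
    rw [show (fun (distances : List EE) (p : Int × TT) =>
        (PySem.List.slice C (some (p.1 + 1)) none).foldl
          (fun ds box2 => ds ++ [(dist2 p.2 box2, p.2, box2)]) distances)
        = (fun distances p => distances ++ (PySem.List.slice C (some (p.1 + 1)) none).map
            (fun box2 => (dist2 p.2 box2, p.2, box2)))
      from funext fun ds => funext fun p => hinner2 p ds]
    rw [PySem.List.foldl_append_eq_flatMap]
    simp
  rw [h2]
  have hlen1 : ((PySem.List.len C - 1 : Int) - 0).toNat = C.length - 1 := by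
    rw [PySem.List.len_eq]; omega
  have hlen2 : ((PySem.List.len C.dropLast : Int) - 0).toNat = C.length - 1 := by
    rw [PySem.List.len_eq]; simp
  rw [PySem.List.enumerate_eq_map_pyRange C.dropLast dB]
  rw [PySem.List.pyRange_one 0 (PySem.List.len C - 1), PySem.List.pyRange_one 0 (PySem.List.len C.dropLast)]
  rw [hlen1, hlen2]
  simp only [List.flatMap_map]
  apply List.flatMap_congr
  intro k hk
  rw [List.mem_range] at hk
  have hkC : k < C.length := by omega
  have hz : (0 : Int) + (k : Int) = ((k : Int)) := by omega
  rw [hz]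
  have hgk : PySem.List.pyGetD C (k : Int) dB = C[k] := by
    rw [PySem.List.pyGetD_natCast, List.getD_eq_getElem C dB hkC]
  have hgk' : PySem.List.pyGetD C.dropLast (k : Int) dB = C[k] := by
    rw [PySem.List.pyGetD_natCast, List.getD_eq_getElem C.dropLast dB (by simp; omega),
      List.getElem_dropLast]
  have hslice : PySem.List.slice C (some ((k : Int) + 1)) none = C.drop (k + 1) := by
    rw [show ((k : Int) + 1) = ((k + 1 : Nat) : Int) by push_cast; ring,
      PySem.List.slice_from_natCast]
  have hrange : PySem.List.pyRange ((k : Int) + 1) (PySem.List.len C) 1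
      = (List.range (C.length - (k + 1))).map (fun m : Nat => ((k : Int) + 1 + (m : Int))) := by
    rw [PySem.List.pyRange_one]
    have hn : ((PySem.List.len C) - ((k : Int) + 1)).toNat = C.length - (k + 1) := by
      rw [PySem.List.len_eq]; omega
    rw [hn]
  simp only [hgk, hgk', hslice, hrange, List.map_map]
  apply List.ext_getElem
  · simp
  · intro m h1' h2'
    simp only [List.getElem_map, List.getElem_range, List.getElem_drop, Function.comp]
    have hm : m < C.length - (k + 1) := by simpa using h2'
    have hidx : PySem.List.pyGetD C ((k : Int) + 1 + (m : Int)) dB = C[k + 1 + m] := by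
      rw [show ((k : Int) + 1 + (m : Int)) = ((k + 1 + m : Nat) : Int) by push_cast; ring,
        PySem.List.pyGetD_natCast, List.getD_eq_getElem C dB (by omega)]
    rw [hidx]

theorem edgesB_eq_sorted_calc (C : List TT) :
    edgesB C = PySem.List.sorted (calcDistances C) keyE false := by
  unfold edgesB
  rw [idxList_eq_calc]

theorem edgesB_endpoints (C : List TT) : ∀ e ∈ edgesB C, e.2.1 ∈ C ∧ e.2.2 ∈ C := by
  intro e he
  have he' := (List.Perm.mem_iff (PySem.List.sorted_perm _ keyE false)).mp he
  rw [idxFlat, List.mem_flatMap] at he'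
  obtain ⟨i, hi, he2⟩ := he'
  rw [List.mem_map] at he2
  obtain ⟨j, hj, rfl⟩ := he2
  rw [PySem.List.mem_pyRange_one] at hi hj
  rw [PySem.List.len_eq] at hi hj
  refine ⟨PySem.List.pyGetD_mem C dB ⟨by omega, by omega⟩,
    PySem.List.pyGetD_mem C dB ⟨by omega, by omega⟩⟩

theorem part2_eq_alt (C : List (Int × Int × Int)) (hpre : Pre_part2 C) :
    part2 C = part2_alt C := by
  obtain ⟨hlen, hnd⟩ := hpre
  simp only [part2, part2_alt]
  rw [loopA_eq_loopUF _ _ _ _ le_rfl, popSeq_heapify_eq_sorted, ← edgesB_eq_sorted_calc]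
  obtain ⟨a, b, t, rfl⟩ : ∃ a b t, C = a :: b :: t := by
    match C with
    | a :: b :: t => exact ⟨a, b, t, rfl⟩
  refine loop_bridge _ hnd _ _ _ _ (ufInit_inv _ hnd) (compB_keys _ hnd) ?_ ?_
    (edgesB_endpoints _)
  · intro x y hx hy
    rw [compB_getD _ hx, compB_getD _ hy]
  · refine ⟨a, List.mem_cons_self, b, List.mem_cons_of_mem _ List.mem_cons_self, ?_⟩
    intro h
    subst h
    simp at hnd

-- ===== VERDICT (by name: the statement is the Claim_ definition above) =====
theorem part2_spec : Claim_equal_part2 := by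
  intro coordinates _ hpre
  unfold Spec_part2
  exact part2_eq_alt coordinates hpre
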